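-- pv_equiv track=rewrite | github.com/T0ny97/CSE221 | lab8/task 3.py | second_best_tree
-- ===== SOURCE A (Python) =====
-- class UnionFind:
--     def __init__(self, size):
--         self.leader = list(range(size))
--         self.depth = [1] * size
--
--     def trace(self, x):
--         if self.leader[x] != x:
--             self.leader[x] = self.trace(self.leader[x])
--         return self.leader[x]
--
--     def connect(self, a, b):
--         rootA = self.trace(a)
--         rootB = self.trace(b)
--         if rootA == rootB:
--             return False
--         if self.depth[rootA] < self.depth[rootB]:
--             self.leader[rootA] = rootB
--         elif self.depth[rootA] > self.depth[rootB]: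
--             self.leader[rootB] = rootA
--         else:
--             self.leader[rootB] = rootA
--             self.depth[rootA] += 1
--         return True
--
-- def find_largest_below(u, target, bound, graph, visited, marker):
--     stack = [(u, -1)]
--     while stack:
--         current, heaviest = stack.pop()
--         if current == target:
--             return heaviest
--         if visited[current] == marker:
--             continue
--         visited[current] = marker
--         for neighbor, weight in graph[current]:
--             if visited[neighbor] != marker:
--                 highest = heaviest
--                 if weight < bound and weight > heaviest:
--                     highest = weight
--                 stack.append((neighbor, highest))
--     return -1
--
-- def second_best_tree(n_nodes, edge_list):
--     edge_list.sort()
--     uf = UnionFind(n_nodes)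
--     mst_total = 0
--     tree = [[] for _ in range(n_nodes)]
--     taken = [False] * len(edge_list)
--
--     for idx, (cost, a, b) in enumerate(edge_list):
--         if uf.connect(a, b):
--             taken[idx] = True
--             mst_total += cost
--             tree[a].append((b, cost))
--             tree[b].append((a, cost))
--
--     if sum(taken) != n_nodes - 1:
--         return -1
--
--     seen = [0] * n_nodes
--     counter = 1
--     alt_total = float('inf')
--
--     for idx, (cost, a, b) in enumerate(edge_list):
--         if taken[idx]:
--             continue
--         counter += 1
--         max_in_path = find_largest_below(a, b, cost, tree, seen, counter)
--         if max_in_path != -1: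
--             candidate_cost = mst_total - max_in_path + cost
--             if candidate_cost > mst_total:
--                 alt_total = min(alt_total, candidate_cost)
--
--     return -1 if alt_total == float('inf') else alt_total
-- ===== SOURCE B (Python) =====
-- def second_best_tree(n_nodes, edge_list):
--     # NOTE: like A, this sorts edge_list in place; the equivalence is about the return value
--     # (the mutation is identical in both).
--     edge_list.sort()
--
--     # Partition kept as a flat component-label array (no union-find forest at all):
--     # two nodes are connected iff their labels are equal; a union relabels one class.
--     comp = list(range(n_nodes))
--     total = 0
--     used = 0
--     adj = [[] for _ in range(n_nodes)]
--     extras = []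
--     for cost, a, b in edge_list:
--         ca, cb = comp[a], comp[b]
--         if ca == cb:
--             extras.append((cost, a, b))
--         else:
--             comp = [ca if c == cb else c for c in comp]
--             used += 1
--             total += cost
--             adj[a].append((b, cost))
--             adj[b].append((a, cost))
--
--     if used != n_nodes - 1:
--         return -1
--
--     # Recursive backtracking search carrying a visited set; returns the largest
--     # tree-edge weight below `bound` seen on the way to `target`, or None if
--     # target was not reached from this branch.
--     def path_max(u, acc, target, bound, visited):
--         if u == target:
--             return acc
--         if u in visited:
--             return None
--         visited.add(u)
--         for v, w in reversed(adj[u]):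
--             r = path_max(v, w if (w < bound and w > acc) else acc, target, bound, visited)
--             if r is not None:
--                 return r
--         return None
--
--     best = None
--     for cost, a, b in extras:
--         m = path_max(a, -1, b, cost, set())
--         if m is not None and m != -1:
--             cand = total - m + cost
--             if cand > total and (best is None or cand < best):
--                 best = cand
--     return -1 if best is None else best
-- ===== Notes on version B (the rewrite author's own statement) =====
-- stated objective: alternative
-- what changed: The union-find forest (recursive path-compressing trace plus union by rank) is replaced by a flat component-label array where connectivity is a label comparison and a union relabels one class; the MST sweep partitions the edges in one pass (running counter + explicit list of non-tree edges) instead of A's preallocated taken[] bitmap, sum(taken), and a second enumerate scan; …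
-- outside the precondition, e.g. on second_best_tree(2, [(2, -2, 0), (0, 0, 1)]): A returns -1, B returns 2
import Mathlib
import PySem

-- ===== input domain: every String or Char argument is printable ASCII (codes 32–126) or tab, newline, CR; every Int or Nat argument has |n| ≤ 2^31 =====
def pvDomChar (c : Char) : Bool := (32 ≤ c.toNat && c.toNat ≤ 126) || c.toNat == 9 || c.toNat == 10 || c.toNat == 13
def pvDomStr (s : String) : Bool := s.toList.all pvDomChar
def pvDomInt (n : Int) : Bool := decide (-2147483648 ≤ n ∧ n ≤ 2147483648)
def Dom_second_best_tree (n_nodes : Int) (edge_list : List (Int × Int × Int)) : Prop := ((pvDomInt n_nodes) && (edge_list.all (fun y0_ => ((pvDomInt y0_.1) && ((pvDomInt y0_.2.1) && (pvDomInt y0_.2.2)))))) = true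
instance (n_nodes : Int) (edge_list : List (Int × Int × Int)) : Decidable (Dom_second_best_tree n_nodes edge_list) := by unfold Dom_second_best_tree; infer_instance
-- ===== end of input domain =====

-- B replaces A's union-find forest by a flat component-label array, A's taken[] bitmap +
-- second enumerate scan by a single sweep collecting the non-tree edges, and A's explicit
-- stack machine over a marker array by a recursive backtracking search with a visited set
-- ("alternative": same O(E*V) worst case overall, different machinery; no speed claim).
-- Both Pythons sort edge_list in place (the same mutation); the claim is about the return
-- value.

-- ===== PORT A =====
-- edge_list.sort(): Python sorts triples lexicographically (cost, a, b); shared by both ports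
def pvSortEdges (edge_list : List (Int × Int × Int)) : List (Int × Int × Int) :=
  PySem.List.sorted2 edge_list (fun e => e.1) (fun e => toLex (e.2.1, e.2.2))

-- UnionFind.trace with path compression; fuel = len(leader) (enough: chains are shorter
-- than the component size; proved in the lemmas below)
def pvTrace : Nat → List Int → Int → Int × List Int
  | 0, L, x => (x, L)
  | fuel+1, L, x =>
    if PySem.List.pyGetD L x 0 ≠ x then
      let r := pvTrace fuel L (PySem.List.pyGetD L x 0)
      let L2 := PySem.List.pySetD r.2 x r.1
      (PySem.List.pyGetD L2 x 0, L2)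
    else (PySem.List.pyGetD L x 0, L)

-- UnionFind.connect: returns (made-a-union, leader, depth)
def pvConnect (L D : List Int) (a b : Int) : Bool × List Int × List Int :=
  let ra := pvTrace L.length L a
  let rb := pvTrace L.length ra.2 b
  if ra.1 = rb.1 then (false, rb.2, D)
  else if PySem.List.pyGetD D ra.1 0 < PySem.List.pyGetD D rb.1 0 then
    (true, PySem.List.pySetD rb.2 ra.1 rb.1, D)
  else if PySem.List.pyGetD D rb.1 0 < PySem.List.pyGetD D ra.1 0 then
    (true, PySem.List.pySetD rb.2 rb.1 ra.1, D)
  else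
    (true, PySem.List.pySetD rb.2 rb.1 ra.1,
      PySem.List.pySetD D ra.1 (PySem.List.pyGetD D ra.1 0 + 1))

structure PvStA where
  L : List Int
  D : List Int
  total : Int
  tree : List (List (Int × Int))
  taken : List Bool
  idx : Int

-- body of A's first loop (one enumerate step)
def pvStepA (st : PvStA) (e : Int × Int × Int) : PvStA :=
  let c := pvConnect st.L st.D e.2.1 e.2.2
  if c.1 then
    let t1 := PySem.List.pySetD st.tree e.2.1
      (PySem.List.pyGetD st.tree e.2.1 [] ++ [(e.2.2, e.1)])
    let t2 := PySem.List.pySetD t1 e.2.2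
      (PySem.List.pyGetD t1 e.2.2 [] ++ [(e.2.1, e.1)])
    { L := c.2.1, D := c.2.2, total := st.total + e.1, tree := t2,
      taken := PySem.List.pySetD st.taken st.idx true, idx := st.idx + 1 }
  else
    -- connect(False) still path-compressed the leader array in place
    { st with L := c.2.1, D := c.2.2, idx := st.idx + 1 }

-- the inner 'for neighbor, weight in graph[current]' push loop of find_largest_below
def pvPush (seen : List Int) (marker bound heaviest : Int)
    (adjU : List (Int × Int)) (st : List (Int × Int)) : List (Int × Int) :=
  adjU.foldl (fun st nw =>
    if PySem.List.pyGetD seen nw.1 0 ≠ marker then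
      (nw.1, if nw.2 < bound ∧ heaviest < nw.2 then nw.2 else heaviest) :: st
    else st) st

-- the 'while stack' loop; fuel = 1 + len(seen) + total adjacency size (an upper bound on
-- the number of iterations, proved in the lemmas below); head of the list = top of stack
def pvFlbLoop : Nat → List (Int × Int) → Int → Int → List (List (Int × Int)) → List Int → Int → Int × List Int
  | 0, _, _, _, _, seen, _ => (-1, seen)
  | fuel+1, stack, target, bound, graph, seen, marker =>
    match stack with
    | [] => (-1, seen)
    | (current, heaviest) :: rest =>
      if current = target then (heaviest, seen)
      else if PySem.List.pyGetD seen current 0 = marker then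
        pvFlbLoop fuel rest target bound graph seen marker
      else
        let seen' := PySem.List.pySetD seen current marker
        pvFlbLoop fuel
          (pvPush seen' marker bound heaviest (PySem.List.pyGetD graph current []) rest)
          target bound graph seen' marker

-- find_largest_below(u, target, bound, graph, visited, marker): returns (result, visited)
def pvFlb (u target bound : Int) (graph : List (List (Int × Int))) (seen : List Int) (marker : Int) : Int × List Int :=
  pvFlbLoop (1 + seen.length + (graph.map List.length).sum) [(u, -1)] target bound graph seen marker

structure PvQA where
  counter : Int
  seen : List Int
  alt : Option Int   -- alt_total; Python's float('inf') ported as none (not an Int value)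
  idx : Int

-- body of A's second loop (one enumerate step)
def pvStepA2 (taken : List Bool) (total : Int) (tree : List (List (Int × Int)))
    (st : PvQA) (e : Int × Int × Int) : PvQA :=
  if PySem.List.pyGetD taken st.idx false then { st with idx := st.idx + 1 }
  else
    let counter := st.counter + 1
    let r := pvFlb e.2.1 e.2.2 e.1 tree st.seen counter
    if r.1 ≠ -1 then
      let cand := total - r.1 + e.1
      if cand > total then
        { counter := counter, seen := r.2,
          alt := some (match st.alt with | none => cand | some v => min v cand),
          idx := st.idx + 1 }
      else { counter := counter, seen := r.2, alt := st.alt, idx := st.idx + 1 }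
    else { counter := counter, seen := r.2, alt := st.alt, idx := st.idx + 1 }

def second_best_tree (n_nodes : Int) (edge_list : List (Int × Int × Int)) : Int :=
  let es := pvSortEdges edge_list
  let st := es.foldl pvStepA
    { L := PySem.List.pyRange 0 n_nodes 1,            -- leader = list(range(size))
      D := PySem.List.pyRepeat [1] n_nodes,           -- depth  = [1] * size
      total := 0,
      tree := (PySem.List.pyRange 0 n_nodes 1).map (fun _ => []),
      taken := PySem.List.pyRepeat [false] (PySem.List.len es),
      idx := 0 }
  if (st.taken.count true : Int) ≠ n_nodes - 1 then -1   -- sum(taken) != n_nodes - 1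
  else
    let q := es.foldl (pvStepA2 st.taken st.total st.tree)
      { counter := 1, seen := PySem.List.pyRepeat [0] n_nodes, alt := none, idx := 0 }
    match q.alt with
    | none => -1        -- alt_total == float('inf')
    | some v => v

-- ===== PORT B =====
structure PvStB where
  comp : List Int
  total : Int
  adj : List (List (Int × Int))
  used : Int
  extras : List (Int × Int × Int)

-- body of B's single Kruskal sweep
def pvStepB (st : PvStB) (e : Int × Int × Int) : PvStB :=
  let ca := PySem.List.pyGetD st.comp e.2.1 0
  let cb := PySem.List.pyGetD st.comp e.2.2 0
  if ca = cb then { st with extras := st.extras ++ [e] }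
  else
    let a1 := PySem.List.pySetD st.adj e.2.1
      (PySem.List.pyGetD st.adj e.2.1 [] ++ [(e.2.2, e.1)])
    { comp := st.comp.map (fun c => if c = cb then ca else c),
      total := st.total + e.1,
      adj := PySem.List.pySetD a1 e.2.2 (PySem.List.pyGetD a1 e.2.2 [] ++ [(e.2.1, e.1)]),
      used := st.used + 1,
      extras := st.extras }

-- path_max: recursion on the tree, visited set threaded through; fuel bounds the
-- recursion depth (n_nodes + 1 is enough: every level marks a fresh node)
mutual
def pvVisit : Nat → Int → Int → List (List (Int × Int)) → Int → Int → PySem.Set Int → Option Int × PySem.Set Int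
  | 0, _, _, _, _, _, vis => (none, vis)
  | fuel+1, target, bound, adj, u, acc, vis =>
    if u = target then (some acc, vis)
    else if u ∈ vis then (none, vis)
    else pvKids fuel target bound adj ((PySem.List.pyGetD adj u []).reverse) acc (PySem.Set.add vis u)
  termination_by fuel _ _ _ _ _ _ => (fuel, 0)

def pvKids : Nat → Int → Int → List (List (Int × Int)) → List (Int × Int) → Int → PySem.Set Int → Option Int × PySem.Set Int
  | _, _, _, _, [], _, vis => (none, vis)
  | fuel, target, bound, adj, (v, w) :: rest, acc, vis =>
    let r := pvVisit fuel target bound adj v (if w < bound ∧ acc < w then w else acc) vis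
    match r.1 with
    | some x => (some x, r.2)
    | none => pvKids fuel target bound adj rest acc r.2
  termination_by fuel _ _ _ kids _ _ => (fuel, kids.length + 1)
end

-- body of B's loop over the non-tree edges
def pvStepB2 (total : Int) (n_nodes : Int) (adj : List (List (Int × Int)))
    (best : Option Int) (e : Int × Int × Int) : Option Int :=
  match (pvVisit (n_nodes.toNat + 1) e.2.2 e.1 adj e.2.1 (-1) PySem.Set.empty).1 with
  | none => best
  | some mv =>
    if mv ≠ -1 then
      let cand := total - mv + e.1
      match best with
      | none => if cand > total then some cand else best
      | some v => if cand > total ∧ cand < v then some cand else best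
    else best

def second_best_tree_alt (n_nodes : Int) (edge_list : List (Int × Int × Int)) : Int :=
  let es := pvSortEdges edge_list
  let st := es.foldl pvStepB
    { comp := PySem.List.pyRange 0 n_nodes 1, total := 0,
      adj := (PySem.List.pyRange 0 n_nodes 1).map (fun _ => []),
      used := 0, extras := [] }
  if st.used ≠ n_nodes - 1 then -1
  else
    match st.extras.foldl (pvStepB2 st.total n_nodes st.adj) none with
    | none => -1
    | some v => v

-- ===== PRECONDITION & SPEC =====
-- Pre_ = the task's natural domain (every endpoint a node id 0 ≤ v < n_nodes), plus the
-- trivially infeasible inputs (fewer than n_nodes-1 edges, ids merely in [-n, n) so A does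
-- not raise), where both programs answer -1 before the representations can matter.
-- Excluded: ids ≥ n_nodes or < -n_nodes, where A raises IndexError; and inputs that reach
-- the search with some id in [-n_nodes, 0), where A returns a value only through Python's
-- negative-index wraparound (an accident of its array representation that B's label/set
-- representation resolves differently).
def Pre_second_best_tree (n_nodes : Int) (edge_list : List (Int × Int × Int)) : Prop :=
  (∀ e ∈ edge_list, (0 ≤ e.2.1 ∧ e.2.1 < n_nodes) ∧ (0 ≤ e.2.2 ∧ e.2.2 < n_nodes)) ∨
  ((∀ e ∈ edge_list, (-n_nodes ≤ e.2.1 ∧ e.2.1 < n_nodes) ∧ (-n_nodes ≤ e.2.2 ∧ e.2.2 < n_nodes)) ∧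
    (edge_list.length : Int) < n_nodes - 1)
instance (n_nodes : Int) (edge_list : List (Int × Int × Int)) : Decidable (Pre_second_best_tree n_nodes edge_list) := by unfold Pre_second_best_tree; infer_instance

def pvWitness_second_best_tree : Int × (List (Int × Int × Int)) := (3, [(1,0,1),(2,1,2),(3,0,2)])

def Spec_second_best_tree (n_nodes : Int) (edge_list : List (Int × Int × Int)) (out : Int) : Prop := out = second_best_tree_alt n_nodes edge_list
instance (n_nodes : Int) (edge_list : List (Int × Int × Int)) (out : Int) : Decidable (Spec_second_best_tree n_nodes edge_list out) := by unfold Spec_second_best_tree; infer_instance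

-- ===== CLAIM (what is proved, stated in full; the proofs are below) =====
def Claim_equal_second_best_tree : Prop := ∀ (n_nodes : Int) (edge_list : List (Int × Int × Int)), Dom_second_best_tree n_nodes edge_list → Pre_second_best_tree n_nodes edge_list → Spec_second_best_tree n_nodes edge_list (second_best_tree n_nodes edge_list)

-- ===== LEMMAS AND PROOFS =====



-- ---------- small indexing helpers ----------
lemma pv_gi_set (L : List Int) (x y v : Int) (hx : 0 ≤ x) (hxl : x < (L.length : Int))
    (hy : 0 ≤ y) (_hyl : y < (L.length : Int)) :
    PySem.List.pyGetD (PySem.List.pySetD L y v) x 0 = if x = y then v else PySem.List.pyGetD L x 0 := by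
  rw [PySem.List.pySetD_of_nonneg _ _ hy,
      PySem.List.pyGetD_eq_getElem _ _ hx (by simpa using hxl),
      PySem.List.pyGetD_eq_getElem _ _ hx (by simpa using hxl)]
  rw [List.getElem_set]
  have hiff : x.toNat = y.toNat ↔ x = y := by omega
  split <;> split <;> simp_all

lemma pv_gi_range (n x : Int) (hx : 0 ≤ x) (hxl : x < n) :
    PySem.List.pyGetD (PySem.List.pyRange 0 n 1) x 0 = x := by
  rw [PySem.List.pyGetD_eq_getElem _ _ hx
        (by rw [PySem.List.length_pyRange_one]; omega)]
  rw [PySem.List.getElem_pyRange_one]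
  omega

lemma pv_gi_map (C : List Int) (f : Int → Int) (x : Int) (hx : 0 ≤ x) (hxl : x < (C.length : Int)) :
    PySem.List.pyGetD (C.map f) x 0 = f (PySem.List.pyGetD C x 0) := by
  rw [PySem.List.pyGetD_eq_getElem _ _ hx (by simpa using hxl),
      PySem.List.pyGetD_eq_getElem _ _ hx (by simpa using hxl)]
  simp

-- ---------- the union-find invariant ----------
def pvInR (n x : Int) : Prop := 0 ≤ x ∧ x < n

lemma pv_gi_setR (n : Int) (L : List Int) (x y v : Int) (hL : L.length = n.toNat)
    (hx : pvInR n x) (hy : pvInR n y) :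
    PySem.List.pyGetD (PySem.List.pySetD L y v) x 0 = if x = y then v else PySem.List.pyGetD L x 0 := by
  obtain ⟨hx0, hx1⟩ := hx; obtain ⟨hy0, hy1⟩ := hy
  exact pv_gi_set L x y v hx0 (by omega) hy0 (by omega)

lemma pv_gi_mapR (n : Int) (C : List Int) (f : Int → Int) (x : Int) (hC : C.length = n.toNat)
    (hx : pvInR n x) :
    PySem.List.pyGetD (C.map f) x 0 = f (PySem.List.pyGetD C x 0) := by
  obtain ⟨hx0, hx1⟩ := hx
  exact pv_gi_map C f x hx0 (by omega)

def pvIter (L : List Int) : Nat → Int → Int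
  | 0, x => x
  | k+1, x => pvIter L k (PySem.List.pyGetD L x 0)

def pvRoot (L : List Int) (x : Int) : Prop := PySem.List.pyGetD L x 0 = x

lemma pvIter_succ (L : List Int) (k : Nat) (x : Int) :
    pvIter L (k+1) x = pvIter L k (PySem.List.pyGetD L x 0) := rfl

-- every node reaches a root in fewer steps than its component size
def pvReach (L C : List Int) (x : Int) : Prop :=
  ∃ k : Nat, k < C.count (PySem.List.pyGetD C x 0) ∧ pvRoot L (pvIter L k x)

def pvUF (n : Int) (L C : List Int) : Prop :=
  L.length = n.toNat ∧ C.length = n.toNat ∧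
  (∀ x, pvInR n x → pvInR n (PySem.List.pyGetD L x 0)) ∧
  (∀ x, pvInR n x → PySem.List.pyGetD C (PySem.List.pyGetD L x 0) 0 = PySem.List.pyGetD C x 0) ∧
  (∀ x y, pvInR n x → pvInR n y → pvRoot L x → pvRoot L y →
     PySem.List.pyGetD C x 0 = PySem.List.pyGetD C y 0 → x = y) ∧
  (∀ x, pvInR n x → pvReach L C x)

-- redirecting one pointer to a root keeps every chain rooted
-- (one step longer in general; not longer when the redirected node was no root)
lemma pv_iter_pres (n : Int) (L : List Int) (c r : Int) (hn : L.length = n.toNat)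
    (hpar : ∀ x, pvInR n x → pvInR n (PySem.List.pyGetD L x 0))
    (hc : pvInR n c) (hrR : pvInR n r) (hcr : r ≠ c) (hr : pvRoot L r) :
    ∀ k z, pvInR n z → pvRoot L (pvIter L k z) →
      ∃ k', (¬ pvRoot L c → k' ≤ k) ∧ k' ≤ k + 1 ∧
        pvRoot (PySem.List.pySetD L c r) (pvIter (PySem.List.pySetD L c r) k' z) := by
  have hr' : pvRoot (PySem.List.pySetD L c r) r := by
    unfold pvRoot at hr ⊢
    rw [pv_gi_setR n L r c r hn hrR hc]
    simp [hcr, hr]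
  have hgi : ∀ z, pvInR n z → z ≠ c →
      PySem.List.pyGetD (PySem.List.pySetD L c r) z 0 = PySem.List.pyGetD L z 0 := by
    intro z hz hzc
    rw [pv_gi_setR n L z c r hn hz hc]
    simp [hzc]
  have hgic : PySem.List.pyGetD (PySem.List.pySetD L c r) c 0 = r := by
    rw [pv_gi_setR n L c c r hn hc hc]; simp
  intro k
  induction k with
  | zero =>
      intro z hz hroot
      by_cases hzc : z = c
      · subst hzc
        exact ⟨1, fun hnr => absurd hroot hnr, by omega, by
          rw [pvIter_succ, hgic]; exact hr'⟩
      · exact ⟨0, fun _ => le_rfl, by omega, by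
          show pvRoot _ z
          unfold pvRoot
          rw [hgi z hz hzc]; exact hroot⟩
  | succ k ih =>
      intro z hz hroot
      by_cases hzc : z = c
      · subst hzc
        refine ⟨1, fun _ => by omega, by omega, ?_⟩
        rw [pvIter_succ, hgic]; exact hr'
      · by_cases hzr : pvRoot L z
        · exact ⟨0, fun _ => by omega, by omega, by
            show pvRoot _ z
            unfold pvRoot
            rw [hgi z hz hzc]; exact hzr⟩
        · have hp : pvInR n (PySem.List.pyGetD L z 0) := hpar z hz
          have hroot' : pvRoot L (pvIter L k (PySem.List.pyGetD L z 0)) := hroot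
          obtain ⟨k', h1, h2, h3⟩ := ih _ hp hroot'
          refine ⟨k' + 1, fun hnr => by have := h1 hnr; omega, by omega, ?_⟩
          rw [pvIter_succ, hgi z hz hzc]
          exact h3

-- chains of a component not containing the redirected node are untouched
lemma pv_iter_avoid (n : Int) (L C : List Int) (h : pvUF n L C) (c r : Int)
    (hc : pvInR n c) :
    ∀ k z, pvInR n z →
      PySem.List.pyGetD C z 0 ≠ PySem.List.pyGetD C c 0 →
      pvRoot L (pvIter L k z) →
      pvRoot (PySem.List.pySetD L c r) (pvIter (PySem.List.pySetD L c r) k z) := by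
  have hgi : ∀ z, pvInR n z → z ≠ c →
      PySem.List.pyGetD (PySem.List.pySetD L c r) z 0 = PySem.List.pyGetD L z 0 := by
    intro z hz hzc
    rw [pv_gi_setR n L z c r h.1 hz hc]
    simp [hzc]
  intro k
  induction k with
  | zero =>
      intro z hz hlab hroot
      have hzc : z ≠ c := fun e => hlab (by rw [e])
      show pvRoot _ z
      unfold pvRoot
      rw [hgi z hz hzc]
      exact hroot
  | succ k ih =>
      intro z hz hlab hroot
      have hzc : z ≠ c := fun e => hlab (by rw [e])
      have hp : pvInR n (PySem.List.pyGetD L z 0) := h.2.2.1 z hz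
      have hplab : PySem.List.pyGetD C (PySem.List.pyGetD L z 0) 0 ≠ PySem.List.pyGetD C c 0 := by
        rw [h.2.2.2.1 z hz]; exact hlab
      rw [pvIter_succ, hgi z hz hzc]
      exact ih _ hp hplab hroot

-- path compression: parent of a non-root x set to a root r of the same component
lemma pv_compress (n : Int) (L C : List Int) (x r : Int) (h : pvUF n L C)
    (hx : pvInR n x) (hrR : pvInR n r) (hroot : pvRoot L r) (hnx : ¬ pvRoot L x)
    (hcl : PySem.List.pyGetD C r 0 = PySem.List.pyGetD C x 0) :
    pvUF n (PySem.List.pySetD L x r) C ∧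
    (∀ z, pvInR n z → (pvRoot (PySem.List.pySetD L x r) z ↔ pvRoot L z)) := by
  have hL : L.length = n.toNat := h.1
  have hrx : r ≠ x := fun e => hnx (e ▸ hroot)
  have hgi : ∀ z, pvInR n z →
      PySem.List.pyGetD (PySem.List.pySetD L x r) z 0 =
        if z = x then r else PySem.List.pyGetD L z 0 := fun z hz =>
    pv_gi_setR n L z x r hL hz hx
  have hroots : ∀ z, pvInR n z → (pvRoot (PySem.List.pySetD L x r) z ↔ pvRoot L z) := by
    intro z hz
    unfold pvRoot
    rw [hgi z hz]
    by_cases hzx : z = x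
    · subst hzx
      rw [if_pos rfl]
      constructor
      · intro e; exact absurd (e ▸ hroot : pvRoot L z) (by simpa using hnx)
      · intro e; exact absurd e hnx
    · simp [hzx]
  refine ⟨⟨by simpa [PySem.List.length_pySetD] using hL, h.2.1, ?_, ?_, ?_, ?_⟩, hroots⟩
  · intro z hz; rw [hgi z hz]; split
    · exact hrR
    · exact h.2.2.1 z hz
  · intro z hz; rw [hgi z hz]; split
    · rename_i e; rw [e, hcl]
    · exact h.2.2.2.1 z hz
  · intro u v hu hv hru hrv hlab
    exact h.2.2.2.2.1 u v hu hv ((hroots u hu).mp hru) ((hroots v hv).mp hrv) hlab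
  · intro z hz
    obtain ⟨k, hk, hkr⟩ := h.2.2.2.2.2 z hz
    obtain ⟨k', h1, _, h3⟩ := pv_iter_pres n L x r hL h.2.2.1 hx hrR hrx hroot k z hz hkr
    exact ⟨k', by have := h1 hnx; omega, h3⟩

-- counting after a relabel cb → ca
lemma pv_count_map (C : List Int) (ca cb : Int) (hne : ca ≠ cb) :
    ((C.map (fun v => if v = cb then ca else v)).count ca = C.count ca + C.count cb) ∧
    (∀ d, d ≠ ca → d ≠ cb → (C.map (fun v => if v = cb then ca else v)).count d = C.count d) := by
  constructor
  · induction C with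
    | nil => simp
    | cons hd tl ih =>
        simp only [List.map_cons, List.count_cons, ih]
        by_cases h1 : hd = cb <;> by_cases h2 : hd = ca <;>
          simp [h1, h2, hne, Ne.symm hne] <;> omega
  · intro d hda hdb
    induction C with
    | nil => simp
    | cons hd tl ih =>
        simp only [List.map_cons, List.count_cons, ih]
        by_cases h1 : hd = cb <;> by_cases h2 : hd = d <;>
          simp_all <;> omega

lemma pv_count_pos (n : Int) (C : List Int) (hC : C.length = n.toNat) (z : Int)
    (hz : pvInR n z) : 0 < C.count (PySem.List.pyGetD C z 0) := by
  obtain ⟨hz0, hz1⟩ := hz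
  have hmem : PySem.List.pyGetD C z 0 ∈ C := by
    rw [PySem.List.pyGetD_eq_getElem _ _ hz0 (by omega)]
    exact List.getElem_mem _
  exact List.count_pos_iff.mpr hmem

-- union: the parent of one root is set to the other; the label side relabels cb → ca
lemma pv_union (n : Int) (L C : List Int) (rA rB : Int) (h : pvUF n L C)
    (hA : pvInR n rA) (hB : pvInR n rB) (hrootA : pvRoot L rA) (hrootB : pvRoot L rB)
    (hne : PySem.List.pyGetD C rA 0 ≠ PySem.List.pyGetD C rB 0)
    (child parent : Int)
    (hcp : (child = rA ∧ parent = rB) ∨ (child = rB ∧ parent = rA)) :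
    pvUF n (PySem.List.pySetD L child parent)
      (C.map (fun v => if v = PySem.List.pyGetD C rB 0 then PySem.List.pyGetD C rA 0 else v)) := by
  have hL : L.length = n.toNat := h.1
  have hC : C.length = n.toNat := h.2.1
  set ca := PySem.List.pyGetD C rA 0 with hca
  set cb := PySem.List.pyGetD C rB 0 with hcb
  have hAB : rA ≠ rB := fun e => hne (by rw [hca, hcb, e])
  have hchild : pvInR n child := by rcases hcp with ⟨e, _⟩ | ⟨e, _⟩ <;> subst e <;> assumption
  have hparent : pvInR n parent := by rcases hcp with ⟨_, e⟩ | ⟨_, e⟩ <;> subst e <;> assumption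
  have hpc : parent ≠ child := by
    rcases hcp with ⟨e1, e2⟩ | ⟨e1, e2⟩ <;> subst e1 <;> subst e2
    · exact hAB.symm
    · exact hAB
  have hrootP : pvRoot L parent := by rcases hcp with ⟨_, e⟩ | ⟨_, e⟩ <;> subst e <;> assumption
  have hgi : ∀ z, pvInR n z →
      PySem.List.pyGetD (PySem.List.pySetD L child parent) z 0 =
        if z = child then parent else PySem.List.pyGetD L z 0 := fun z hz =>
    pv_gi_setR n L z child parent hL hz hchild
  have hlab : ∀ z, pvInR n z →
      PySem.List.pyGetD (C.map (fun v => if v = cb then ca else v)) z 0 =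
        if PySem.List.pyGetD C z 0 = cb then ca else PySem.List.pyGetD C z 0 := fun z hz =>
    pv_gi_mapR n C _ z hC hz
  have hCL : PySem.List.pyGetD C child 0 = ca ∨ PySem.List.pyGetD C child 0 = cb := by
    rcases hcp with ⟨e, _⟩ | ⟨e, _⟩ <;> subst e
    · exact Or.inl rfl
    · exact Or.inr rfl
  have hroots : ∀ z, pvInR n z →
      (pvRoot (PySem.List.pySetD L child parent) z ↔ (z ≠ child ∧ pvRoot L z)) := by
    intro z hz
    unfold pvRoot
    rw [hgi z hz]
    by_cases hzc : z = child
    · subst hzc; simp [hpc]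
    · rw [if_neg hzc]
      exact ⟨fun hh => ⟨hzc, hh⟩, fun hh => hh.2⟩
  refine ⟨by simpa [PySem.List.length_pySetD] using hL, by simpa using hC, ?_, ?_, ?_, ?_⟩
  · intro z hz; rw [hgi z hz]; split
    · exact hparent
    · exact h.2.2.1 z hz
  · intro z hz
    have hp : pvInR n (PySem.List.pyGetD L z 0) := h.2.2.1 z hz
    rw [hgi z hz]
    split
    · rename_i e
      subst e
      rw [hlab parent hparent, hlab z hz]
      rcases hcp with ⟨e1, e2⟩ | ⟨e1, e2⟩ <;> subst e1 <;> subst e2 <;>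
        simp [← hca, ← hcb, hne, Ne.symm hne]
    · rw [hlab _ hp, hlab z hz, h.2.2.2.1 z hz]
  · intro u v hu hv hru hrv hl
    have hu' := (hroots u hu).mp hru
    have hv' := (hroots v hv).mp hrv
    rw [hlab u hu, hlab v hv] at hl
    by_cases e1 : PySem.List.pyGetD C u 0 = cb <;> by_cases e2 : PySem.List.pyGetD C v 0 = cb
    · exact h.2.2.2.2.1 u v hu hv hu'.2 hv'.2 (by rw [e1, e2])
    · rw [if_pos e1, if_neg e2] at hl
      have hub : u = rB := h.2.2.2.2.1 u rB hu hB hu'.2 hrootB (by rw [e1])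
      have hva : v = rA := h.2.2.2.2.1 v rA hv hA hv'.2 hrootA (by rw [← hl])
      exfalso
      rcases hcp with ⟨e, _⟩ | ⟨e, _⟩
      · exact hva ▸ hv'.1 <| by rw [e]
      · exact hub ▸ hu'.1 <| by rw [e]
    · rw [if_neg e1, if_pos e2] at hl
      have hub : u = rA := h.2.2.2.2.1 u rA hu hA hu'.2 hrootA (by rw [hl])
      have hva : v = rB := h.2.2.2.2.1 v rB hv hB hv'.2 hrootB (by rw [e2])
      exfalso
      rcases hcp with ⟨e, _⟩ | ⟨e, _⟩
      · exact hub ▸ hu'.1 <| by rw [e]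
      · exact hva ▸ hv'.1 <| by rw [e]
    · rw [if_neg e1, if_neg e2] at hl
      exact h.2.2.2.2.1 u v hu hv hu'.2 hv'.2 hl
  · intro z hz
    obtain ⟨k, hk, hkr⟩ := h.2.2.2.2.2 z hz
    have hcount := pv_count_map C ca cb hne
    unfold pvReach
    rw [hlab z hz]
    by_cases e1 : PySem.List.pyGetD C z 0 = cb
    · obtain ⟨k', _, h2, h3⟩ :=
        pv_iter_pres n L child parent hL h.2.2.1 hchild hparent hpc hrootP k z hz hkr
      refine ⟨k', ?_, h3⟩
      rw [if_pos e1, hcount.1]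
      have h1 : 0 < C.count ca := hca ▸ pv_count_pos n C hC rA hA
      rw [e1] at hk; omega
    · by_cases e2 : PySem.List.pyGetD C z 0 = ca
      · obtain ⟨k', _, h2, h3⟩ :=
          pv_iter_pres n L child parent hL h.2.2.1 hchild hparent hpc hrootP k z hz hkr
        refine ⟨k', ?_, h3⟩
        rw [if_neg e1, e2, hcount.1]
        have h1 : 0 < C.count cb := hcb ▸ pv_count_pos n C hC rB hB
        rw [e2] at hk; omega
      · have hlabne : PySem.List.pyGetD C z 0 ≠ PySem.List.pyGetD C child 0 := by
          rcases hCL with e | e <;> rw [e] <;> assumption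
        refine ⟨k, ?_, pv_iter_avoid n L C h child parent hchild k z hz hlabne hkr⟩
        rw [if_neg e1, hcount.2 _ e2 e1]
        exact hk


-- ---------- trace and connect against the invariant ----------
lemma pv_trace_spec (n : Int) (L C : List Int) (x : Int) (fuel k : Nat)
    (h : pvUF n L C) (hx : pvInR n x) (hk : pvRoot L (pvIter L k x)) (hfuel : k < fuel) :
    pvInR n (pvTrace fuel L x).1 ∧ pvRoot L (pvTrace fuel L x).1 ∧
    PySem.List.pyGetD C (pvTrace fuel L x).1 0 = PySem.List.pyGetD C x 0 ∧
    pvUF n (pvTrace fuel L x).2 C ∧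
    (∀ z, pvInR n z → (pvRoot (pvTrace fuel L x).2 z ↔ pvRoot L z)) := by
  induction fuel generalizing x k with
  | zero => omega
  | succ fuel ih =>
      by_cases hpx : PySem.List.pyGetD L x 0 = x
      · have : pvTrace (fuel+1) L x = (PySem.List.pyGetD L x 0, L) := by
          unfold pvTrace; simp [hpx]
        rw [this]
        exact ⟨by rw [hpx]; exact hx, by show pvRoot L _; rw [hpx]; exact hpx,
          by rw [hpx], h, fun z _ => Iff.rfl⟩
      · -- x is no root; recurse on the parent
        have hkpos : ∃ j, k = j + 1 := by
          cases k with
          | zero => exact absurd hk hpx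
          | succ j => exact ⟨j, rfl⟩
        obtain ⟨j, rfl⟩ := hkpos
        have hp : pvInR n (PySem.List.pyGetD L x 0) := h.2.2.1 x hx
        have hkp : pvRoot L (pvIter L j (PySem.List.pyGetD L x 0)) := hk
        obtain ⟨r1R, r1root, r1lab, r2UF, r2roots⟩ := ih (PySem.List.pyGetD L x 0) j hp hkp (by omega)
        set r := pvTrace fuel L (PySem.List.pyGetD L x 0) with hr
        have hxnr2 : ¬ pvRoot r.2 x := fun hh => hpx ((r2roots x hx).mp hh)
        have hr1r2 : pvRoot r.2 r.1 := (r2roots r.1 r1R).mpr r1root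
        have hlabx : PySem.List.pyGetD C r.1 0 = PySem.List.pyGetD C x 0 := by
          rw [r1lab, h.2.2.2.1 x hx]
        have hcomp := pv_compress n r.2 C x r.1 r2UF hx r1R hr1r2 hxnr2 hlabx
        have hres : pvTrace (fuel+1) L x =
            (PySem.List.pyGetD (PySem.List.pySetD r.2 x r.1) x 0, PySem.List.pySetD r.2 x r.1) := by
          unfold pvTrace
          rw [if_pos (show PySem.List.pyGetD L x 0 ≠ x from hpx)]
        have hgx : PySem.List.pyGetD (PySem.List.pySetD r.2 x r.1) x 0 = r.1 := by
          rw [pv_gi_setR n r.2 x x r.1 r2UF.1 hx hx]; simp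
        rw [hres, hgx]
        refine ⟨r1R, r1root, hlabx, hcomp.1, ?_⟩
        intro z hz
        rw [hcomp.2 z hz]
        exact r2roots z hz

lemma pv_connect_spec (n : Int) (L D C : List Int) (a b : Int)
    (h : pvUF n L C) (ha : pvInR n a) (hb : pvInR n b) :
    ((pvConnect L D a b).1 =
      decide (¬ PySem.List.pyGetD C a 0 = PySem.List.pyGetD C b 0)) ∧
    (pvConnect L D a b).2.2.length = D.length ∧
    pvUF n (pvConnect L D a b).2.1
      (if PySem.List.pyGetD C a 0 = PySem.List.pyGetD C b 0 then C
       else C.map (fun v => if v = PySem.List.pyGetD C b 0 then PySem.List.pyGetD C a 0 else v)) := by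
  have hC : C.length = n.toNat := h.2.1
  -- first trace
  obtain ⟨ka, hka, hkra⟩ := h.2.2.2.2.2 a ha
  have hfa : ka < L.length := by
    have := List.count_le_length (l := C) (a := PySem.List.pyGetD C a 0)
    have hL : L.length = n.toNat := h.1
    omega
  obtain ⟨raR, raroot, ralab, ra2UF, ra2roots⟩ := pv_trace_spec n L C a L.length ka h ha hkra hfa
  set ra := pvTrace L.length L a with hra
  -- second trace, on the updated list
  obtain ⟨kb, hkb, hkrb⟩ := ra2UF.2.2.2.2.2 b hb
  have hfb : kb < L.length := by
    have := List.count_le_length (l := C) (a := PySem.List.pyGetD C b 0)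
    have hL : L.length = n.toNat := h.1
    omega
  obtain ⟨rbR, rbroot, rblab, rb2UF, rb2roots⟩ := pv_trace_spec n ra.2 C b L.length kb ra2UF hb hkrb hfb
  set rb := pvTrace L.length ra.2 b with hrb
  -- roots in the original list
  have hrozA : pvRoot ra.2 ra.1 := (ra2roots ra.1 raR).mpr raroot
  have hrozA2 : pvRoot rb.2 ra.1 := (rb2roots ra.1 raR).mpr hrozA
  have hrozB2 : pvRoot rb.2 rb.1 := (rb2roots rb.1 rbR).mpr rbroot
  have hiff : ra.1 = rb.1 ↔ PySem.List.pyGetD C a 0 = PySem.List.pyGetD C b 0 := by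
    constructor
    · intro e; rw [← ralab, ← rblab, e]
    · intro e
      exact rb2UF.2.2.2.2.1 ra.1 rb.1 raR rbR hrozA2 hrozB2 (by rw [ralab, rblab, e])
  unfold pvConnect
  simp only [← hra, ← hrb]
  by_cases he : ra.1 = rb.1
  · simp only [if_pos he]
    have := hiff.mp he
    refine ⟨by simp [this], by simp, by rw [if_pos this]; exact rb2UF⟩
  · have hlabne : ¬ PySem.List.pyGetD C a 0 = PySem.List.pyGetD C b 0 := fun e => he (hiff.mpr e)
    have hunion := fun child parent hcp =>
      pv_union n rb.2 C ra.1 rb.1 rb2UF raR rbR hrozA2 hrozB2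
        (by rw [ralab, rblab]; exact hlabne) child parent hcp
    have hu1 := hunion ra.1 rb.1 (Or.inl ⟨rfl, rfl⟩)
    have hu2 := hunion rb.1 ra.1 (Or.inr ⟨rfl, rfl⟩)
    rw [ralab, rblab] at hu1 hu2
    simp only [if_neg he]
    by_cases h1 : PySem.List.pyGetD D ra.1 0 < PySem.List.pyGetD D rb.1 0
    · simp only [if_pos h1]
      exact ⟨by simp [hlabne], by simp, by rw [if_neg hlabne]; exact hu1⟩
    · simp only [if_neg h1]
      by_cases h2 : PySem.List.pyGetD D rb.1 0 < PySem.List.pyGetD D ra.1 0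
      · simp only [if_pos h2]
        exact ⟨by simp [hlabne], by simp, by rw [if_neg hlabne]; exact hu2⟩
      · simp only [if_neg h2]
        exact ⟨by simp [hlabne], by simp [PySem.List.length_pySetD], by rw [if_neg hlabne]; exact hu2⟩


-- ---------- phase 1: the two Kruskal sweeps in lockstep ----------
lemma pv_set_mid {α : Type} (pre : List α) (x v : α) (tl : List α) :
    PySem.List.pySetD (pre ++ x :: tl) ((pre.length : Nat) : Int) v = pre ++ v :: tl := by
  rw [PySem.List.pySetD_of_nonneg _ _ (by positivity)]
  simp only [Int.toNat_natCast]
  induction pre with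
  | nil => simp
  | cons hd tlp ih => simp [List.set_cons_succ, ih]

def pvTreeOK (n : Int) (tr : List (List (Int × Int))) : Prop :=
  tr.length = n.toNat ∧ ∀ l ∈ tr, ∀ p ∈ l, pvInR n p.1

def pvZipNeg : List (Int × Int × Int) → List Bool → List (Int × Int × Int)
  | e :: es, b :: bs => if b then pvZipNeg es bs else e :: pvZipNeg es bs
  | _, _ => []

def pvCore (n : Int) (sa : PvStA) (sb : PvStB) : Prop :=
  pvUF n sa.L sb.comp ∧ sa.D.length = n.toNat ∧ sa.total = sb.total ∧
  sa.tree = sb.adj ∧ pvTreeOK n sa.tree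

lemma pv_mem_pySetD {α : Type} (t : List α) (z : Int) (l x : α)
    (hx : x ∈ PySem.List.pySetD t z l) : x ∈ t ∨ x = l := by
  unfold PySem.List.pySetD PySem.List.pySet? at hx
  cases h : PySem.List.pyIdx? t.length z with
  | none => rw [h] at hx; simp at hx; exact Or.inl hx
  | some i =>
      rw [h] at hx
      simp only [Option.map_some, Option.getD_some] at hx
      exact List.mem_or_eq_of_mem_set hx

lemma pv_treeok_step (n : Int) (tr : List (List (Int × Int))) (a b c : Int)
    (h : pvTreeOK n tr) (ha : pvInR n a) (hb : pvInR n b) :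
    pvTreeOK n
      (PySem.List.pySetD (PySem.List.pySetD tr a (PySem.List.pyGetD tr a [] ++ [(b, c)])) b
        (PySem.List.pyGetD (PySem.List.pySetD tr a (PySem.List.pyGetD tr a [] ++ [(b, c)])) b [] ++ [(a, c)])) := by
  obtain ⟨hlen, hmem⟩ := h
  have hmem_get : ∀ (t : List (List (Int × Int))), t.length = n.toNat →
      (∀ l ∈ t, ∀ p ∈ l, pvInR n p.1) → ∀ (z w : Int), pvInR n z → pvInR n w →
      ∀ q ∈ PySem.List.pyGetD t z [] ++ [(w, c)], pvInR n q.1 := by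
    intro t hl hm z w hz hw q hq
    rcases List.mem_append.mp hq with h1 | h1
    · obtain ⟨hz0, hz1⟩ := hz
      have hmm : PySem.List.pyGetD t z [] ∈ t := by
        rw [PySem.List.pyGetD_eq_getElem _ _ hz0 (by omega)]
        exact List.getElem_mem _
      exact hm _ hmm q h1
    · have : q = (w, c) := List.mem_singleton.mp h1
      rw [this]; exact hw
  have hset : ∀ (t : List (List (Int × Int))) (z : Int) (l : List (Int × Int)),
      t.length = n.toNat → (∀ l' ∈ t, ∀ p ∈ l', pvInR n p.1) → (∀ p ∈ l, pvInR n p.1) →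
      (PySem.List.pySetD t z l).length = n.toNat ∧
      (∀ l' ∈ PySem.List.pySetD t z l, ∀ p ∈ l', pvInR n p.1) := by
    intro t z l hl hm hml
    refine ⟨by simpa [PySem.List.length_pySetD] using hl, ?_⟩
    intro l' hl' p hp
    rcases pv_mem_pySetD t z l l' hl' with h1 | h1
    · exact hm _ h1 p hp
    · rw [h1] at hp; exact hml p hp
  obtain ⟨h1l, h1m⟩ := hset tr a _ hlen hmem (hmem_get tr hlen hmem a b ha hb)
  exact ⟨(hset _ b _ h1l h1m (hmem_get _ h1l h1m b a hb ha)).1,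
         (hset _ b _ h1l h1m (hmem_get _ h1l h1m b a hb ha)).2⟩

lemma pv_run1 (n : Int) (esLen : Nat) :
    ∀ (rest : List (Int × Int × Int)) (ds : List Bool) (sa : PvStA) (sb : PvStB),
      (∀ e ∈ rest, pvInR n e.2.1 ∧ pvInR n e.2.2) →
      pvCore n sa sb →
      sa.taken = ds ++ List.replicate (esLen - ds.length) false →
      sa.idx = (ds.length : Int) →
      ds.length + rest.length ≤ esLen →
      ((ds.count true : Int) = sb.used) →
      ∃ dsn : List Bool,
        dsn.length = rest.length ∧
        (rest.foldl pvStepA sa).taken =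
          (ds ++ dsn) ++ List.replicate (esLen - (ds.length + rest.length)) false ∧
        (rest.foldl pvStepA sa).idx = ((ds.length + rest.length : Nat) : Int) ∧
        (((ds ++ dsn).count true : Int) = (rest.foldl pvStepB sb).used) ∧
        (rest.foldl pvStepB sb).extras = sb.extras ++ pvZipNeg rest dsn ∧
        pvCore n (rest.foldl pvStepA sa) (rest.foldl pvStepB sb) := by
  intro rest
  induction rest with
  | nil =>
      intro ds sa sb _ hcore htk hidx hroom hcnt
      exact ⟨[], by simp, by simpa using htk, by simpa using hidx, by simpa using hcnt,
        by simp [pvZipNeg], hcore⟩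
  | cons e rest ih =>
      intro ds sa sb hre hcore htk hidx hroom hcnt
      obtain ⟨ha, hb⟩ := hre e (List.mem_cons_self ..)
      obtain ⟨hUF, hD, htot, htree, htok⟩ := hcore
      have hconn := pv_connect_spec n sa.L sa.D sb.comp e.2.1 e.2.2 hUF ha hb
      have hrep : List.replicate (esLen - ds.length) false =
          false :: List.replicate (esLen - (ds.length + 1)) false := by
        have : esLen - ds.length = (esLen - (ds.length + 1)) + 1 := by simp at hroom ⊢; omega
        rw [this, List.replicate_succ]
      by_cases hcc : PySem.List.pyGetD sb.comp e.2.1 0 = PySem.List.pyGetD sb.comp e.2.2 0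
      · -- not a tree edge
        have hok : (pvConnect sa.L sa.D e.2.1 e.2.2).1 = false := by simp [hconn.1, hcc]
        have hstepA : pvStepA sa e =
            { sa with L := (pvConnect sa.L sa.D e.2.1 e.2.2).2.1,
                      D := (pvConnect sa.L sa.D e.2.1 e.2.2).2.2, idx := sa.idx + 1 } := by
          unfold pvStepA
          simp only [hok, Bool.false_eq_true, if_false]
        have hstepB : pvStepB sb e = { sb with extras := sb.extras ++ [e] } := by
          unfold pvStepB
          simp only [if_pos hcc]
        have hUF' : pvUF n (pvConnect sa.L sa.D e.2.1 e.2.2).2.1 sb.comp := by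
          have := hconn.2.2; rwa [if_pos hcc] at this
        rw [List.foldl_cons, List.foldl_cons]
        obtain ⟨dsn, hl1, hl2, hl3, hl4, hl5, hl6⟩ :=
          ih (ds ++ [false]) (pvStepA sa e) (pvStepB sb e)
            (fun e' he' => hre e' (List.mem_cons_of_mem _ he'))
            (by rw [hstepA, hstepB]
                exact ⟨hUF', by simpa [hconn.2.1] using hD, htot, htree, htok⟩)
            (by rw [hstepA]; show sa.taken = _; rw [htk, hrep]; simp)
            (by rw [hstepA]; show sa.idx + 1 = _; rw [hidx]
                simp only [List.length_append, List.length_singleton]; push_cast; omega)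
            (by simp at hroom ⊢; omega)
            (by rw [hstepB]; show _ = sb.used; simpa using hcnt)
        refine ⟨false :: dsn, by simpa using hl1, ?_, ?_, ?_, ?_, hl6⟩
        · have hk : esLen - ((ds ++ [false]).length + rest.length) =
              esLen - (ds.length + (e :: rest).length) := by simp; omega
          rw [hl2, hk]; simp
        · rw [hl3]
          push_cast [List.length_append, List.length_singleton, List.length_cons, List.length_nil]
          omega
        · rw [← hl4]; simp
        · rw [hl5, hstepB]; simp [pvZipNeg]
      · -- a tree edge
        have hok : (pvConnect sa.L sa.D e.2.1 e.2.2).1 = true := by simp [hconn.1, hcc]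
        have hstepA : pvStepA sa e =
            { L := (pvConnect sa.L sa.D e.2.1 e.2.2).2.1,
              D := (pvConnect sa.L sa.D e.2.1 e.2.2).2.2,
              total := sa.total + e.1,
              tree := PySem.List.pySetD
                (PySem.List.pySetD sa.tree e.2.1 (PySem.List.pyGetD sa.tree e.2.1 [] ++ [(e.2.2, e.1)]))
                e.2.2
                (PySem.List.pyGetD
                  (PySem.List.pySetD sa.tree e.2.1 (PySem.List.pyGetD sa.tree e.2.1 [] ++ [(e.2.2, e.1)]))
                  e.2.2 [] ++ [(e.2.1, e.1)]),
              taken := PySem.List.pySetD sa.taken sa.idx true,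
              idx := sa.idx + 1 } := by
          unfold pvStepA
          simp only [hok, if_true]
        have hstepB : pvStepB sb e =
            { comp := sb.comp.map (fun c =>
                if c = PySem.List.pyGetD sb.comp e.2.2 0 then PySem.List.pyGetD sb.comp e.2.1 0 else c),
              total := sb.total + e.1,
              adj := PySem.List.pySetD
                (PySem.List.pySetD sb.adj e.2.1 (PySem.List.pyGetD sb.adj e.2.1 [] ++ [(e.2.2, e.1)]))
                e.2.2
                (PySem.List.pyGetD
                  (PySem.List.pySetD sb.adj e.2.1 (PySem.List.pyGetD sb.adj e.2.1 [] ++ [(e.2.2, e.1)]))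
                  e.2.2 [] ++ [(e.2.1, e.1)]),
              used := sb.used + 1,
              extras := sb.extras } := by
          unfold pvStepB
          simp only [if_neg hcc]
        have htaken' : PySem.List.pySetD sa.taken sa.idx true =
            (ds ++ [true]) ++ List.replicate (esLen - (ds.length + 1)) false := by
          rw [htk, hrep, hidx, pv_set_mid]
          simp
        have hUF' : pvUF n (pvConnect sa.L sa.D e.2.1 e.2.2).2.1
            (sb.comp.map (fun c =>
              if c = PySem.List.pyGetD sb.comp e.2.2 0 then PySem.List.pyGetD sb.comp e.2.1 0 else c)) := by
          have := hconn.2.2; rwa [if_neg hcc] at this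
        rw [List.foldl_cons, List.foldl_cons]
        obtain ⟨dsn, hl1, hl2, hl3, hl4, hl5, hl6⟩ :=
          ih (ds ++ [true]) (pvStepA sa e) (pvStepB sb e)
            (fun e' he' => hre e' (List.mem_cons_of_mem _ he'))
            (by rw [hstepA, hstepB]
                refine ⟨hUF', by simpa [hconn.2.1] using hD, by simp [htot], ?_, ?_⟩
                · show PySem.List.pySetD _ _ _ = _
                  rw [htree]
                · show pvTreeOK n (PySem.List.pySetD _ _ _)
                  exact pv_treeok_step n sa.tree e.2.1 e.2.2 e.1 htok ha hb)
            (by rw [hstepA]; show PySem.List.pySetD sa.taken sa.idx true = _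
                rw [htaken']; simp)
            (by rw [hstepA]; show sa.idx + 1 = _; rw [hidx]
                simp only [List.length_append, List.length_singleton]; push_cast; omega)
            (by simp at hroom ⊢; omega)
            (by rw [hstepB]; show _ = sb.used + 1
                simp only [List.count_append]
                push_cast
                simp
                omega)
        refine ⟨true :: dsn, by simpa using hl1, ?_, ?_, ?_, ?_, hl6⟩
        · have hk : esLen - ((ds ++ [true]).length + rest.length) =
              esLen - (ds.length + (e :: rest).length) := by simp; omega
          rw [hl2, hk]; simp
        · rw [hl3]
          push_cast [List.length_append, List.length_singleton, List.length_cons, List.length_nil]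
          omega
        · rw [← hl4]; simp [List.count_append]
        · rw [hl5, hstepB]; simp [pvZipNeg]


-- ---------- phase 2: the stack machine vs the recursive search ----------
def pvSeq (fb : Nat) (t bd : Int) (adj : List (List (Int × Int))) :
    List (Int × Int) → PySem.Set Int → Option Int × PySem.Set Int
  | [], vis => (none, vis)
  | (v, h) :: fs, vis =>
    let r := pvVisit fb t bd adj v h vis
    match r.1 with
    | some x => (some x, r.2)
    | none => pvSeq fb t bd adj fs r.2

def pvUnvis (n : Int) (vis : List Int) : Nat :=
  ((PySem.List.pyRange 0 n 1).filter (fun v => decide (v ∉ vis))).length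

def pvDeg (adj : List (List (Int × Int))) (v : Int) : Nat :=
  (PySem.List.pyGetD adj v []).length

def pvMu (n : Int) (adj : List (List (Int × Int))) (m : Int)
    (stack : List (Int × Int)) (seen : List Int) : Nat :=
  stack.length +
    (((PySem.List.pyRange 0 n 1).filter
        (fun v => decide (PySem.List.pyGetD seen v 0 ≠ m))).map
      (fun v => 1 + pvDeg adj v)).sum

-- equations of the mutual recursion, as rewrite lemmas
lemma pvVisit_zero (t bd u acc : Int) (adj : List (List (Int × Int))) (vis : PySem.Set Int) :
    pvVisit 0 t bd adj u acc vis = (none, vis) := by rw [pvVisit]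

lemma pvVisit_succ (fuel : Nat) (t bd u acc : Int) (adj : List (List (Int × Int))) (vis : PySem.Set Int) :
    pvVisit (fuel+1) t bd adj u acc vis =
      (if u = t then (some acc, vis)
       else if u ∈ vis then (none, vis)
       else pvKids fuel t bd adj ((PySem.List.pyGetD adj u []).reverse) acc (PySem.Set.add vis u)) := by
  rw [pvVisit]

lemma pvKids_nil (fuel : Nat) (t bd acc : Int) (adj : List (List (Int × Int))) (vis : PySem.Set Int) :
    pvKids fuel t bd adj [] acc vis = (none, vis) := by rw [pvKids]

lemma pvKids_cons (fuel : Nat) (t bd v w acc : Int) (adj : List (List (Int × Int)))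
    (rest : List (Int × Int)) (vis : PySem.Set Int) :
    pvKids fuel t bd adj ((v,w) :: rest) acc vis =
      (match (pvVisit fuel t bd adj v (if w < bd ∧ acc < w then w else acc) vis).1 with
       | some x => (some x, (pvVisit fuel t bd adj v (if w < bd ∧ acc < w then w else acc) vis).2)
       | none => pvKids fuel t bd adj rest acc
           (pvVisit fuel t bd adj v (if w < bd ∧ acc < w then w else acc) vis).2) := by
  rw [pvKids]

lemma pvFlbLoop_zero (stack : List (Int × Int)) (t bd : Int)
    (g : List (List (Int × Int))) (seen : List Int) (m : Int) :
    pvFlbLoop 0 stack t bd g seen m = (-1, seen) := by rw [pvFlbLoop]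

lemma pvFlbLoop_nil (fuel : Nat) (t bd : Int)
    (g : List (List (Int × Int))) (seen : List Int) (m : Int) :
    pvFlbLoop (fuel+1) [] t bd g seen m = (-1, seen) := by rw [pvFlbLoop]

lemma pvFlbLoop_cons (fuel : Nat) (c h t bd : Int) (rest : List (Int × Int))
    (g : List (List (Int × Int))) (seen : List Int) (m : Int) :
    pvFlbLoop (fuel+1) ((c, h) :: rest) t bd g seen m =
      (if c = t then (h, seen)
       else if PySem.List.pyGetD seen c 0 = m then pvFlbLoop fuel rest t bd g seen m
       else pvFlbLoop fuel
         (pvPush (PySem.List.pySetD seen c m) m bd h (PySem.List.pyGetD g c []) rest)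
         t bd g (PySem.List.pySetD seen c m) m) := by
  rw [pvFlbLoop]

-- generic list facts used below
lemma pv_filter_len_mono {α : Type} (l : List α) (p q : α → Bool)
    (h : ∀ x, p x = true → q x = true) : (l.filter p).length ≤ (l.filter q).length := by
  induction l with
  | nil => simp
  | cons hd tl ih =>
      simp only [List.filter_cons]
      by_cases hp : p hd = true
      · rw [if_pos hp, if_pos (h hd hp)]
        simpa using ih
      · rw [if_neg hp]
        split
        · simp; omega
        · exact ih

lemma pv_filter_ne_len {α : Type} [DecidableEq α] (l : List α) (c : α)
    (hnd : l.Nodup) (hc : c ∈ l) :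
    (l.filter (fun v => decide (v ≠ c))).length + 1 = l.length := by
  induction l with
  | nil => simp at hc
  | cons hd tl ih =>
      by_cases he : hd = c
      · subst he
        have hnotin : hd ∉ tl := (List.nodup_cons.mp hnd).1
        have hfil : tl.filter (fun v => decide (v ≠ hd)) = tl :=
          List.filter_eq_self.mpr (fun x hx => by
            simp only [decide_eq_true_eq]
            exact fun e => hnotin (e ▸ hx))
        rw [List.filter_cons, if_neg (by simp), hfil, List.length_cons]
      · have h1 : c ∈ tl := by
          rcases List.mem_cons.mp hc with h2 | h2
          · exact absurd h2.symm he
          · exact h2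
        simp only [List.filter_cons]
        rw [if_pos (by simpa using he)]
        have := ih (List.nodup_cons.mp hnd).2 h1
        simp only [List.length_cons]
        omega

lemma pv_sum_remove (l : List Int) (c : Int) (f : Int → Nat) (hnd : l.Nodup) (hc : c ∈ l) :
    ((l.map f).sum = f c + ((l.filter (fun v => decide (v ≠ c))).map f).sum) := by
  induction l with
  | nil => simp at hc
  | cons hd tl ih =>
      by_cases he : hd = c
      · subst he
        have hnotin : hd ∉ tl := (List.nodup_cons.mp hnd).1
        have hfil : tl.filter (fun v => decide (v ≠ hd)) = tl :=
          List.filter_eq_self.mpr (fun x hx => by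
            simp only [decide_eq_true_eq]
            exact fun e => hnotin (e ▸ hx))
        rw [List.filter_cons, if_neg (by simp), hfil, List.map_cons, List.sum_cons]
      · have h1 : c ∈ tl := by
          rcases List.mem_cons.mp hc with h2 | h2
          · exact absurd h2.symm he
          · exact h2
        simp only [List.filter_cons]
        rw [if_pos (by simpa using he)]
        have := ih (List.nodup_cons.mp hnd).2 h1
        simp only [List.map_cons, List.sum_cons, this]
        omega

lemma pv_unvis_le (n : Int) (vis : List Int) : pvUnvis n vis ≤ n.toNat := by
  have := List.length_filter_le (fun v => decide (v ∉ vis)) (PySem.List.pyRange 0 n 1)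
  simpa [pvUnvis, PySem.List.length_pyRange_one] using this

lemma pv_unvis_anti (n : Int) (vis vis' : List Int) (h : ∀ x ∈ vis, x ∈ vis') :
    pvUnvis n vis' ≤ pvUnvis n vis := by
  apply pv_filter_len_mono
  intro x hx
  simp only [decide_eq_true_eq] at hx ⊢
  exact fun hmem => hx (h x hmem)

lemma pv_unvis_add (n : Int) (vis : List Int) (u : Int) (hu : pvInR n u) (hnv : u ∉ vis) :
    pvUnvis n (PySem.Set.add vis u) + 1 = pvUnvis n vis := by
  obtain ⟨h0, h1⟩ := hu
  unfold pvUnvis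
  have hcong : (PySem.List.pyRange 0 n 1).filter (fun v => decide (v ∉ PySem.Set.add vis u)) =
      ((PySem.List.pyRange 0 n 1).filter (fun v => decide (v ∉ vis))).filter
        (fun v => decide (v ≠ u)) := by
    rw [List.filter_filter]
    apply List.filter_congr
    intro x _
    simp [PySem.Set.mem_add, not_or, And.comm]
  rw [hcong]
  apply pv_filter_ne_len
  · exact (PySem.List.nodup_pyRange_one 0 n).filter _
  · rw [List.mem_filter]
    exact ⟨PySem.List.mem_pyRange_one.mpr ⟨h0, h1⟩, by simpa using hnv⟩

lemma pvKids_zero (t bd : Int) (adj : List (List (Int × Int))) :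
    ∀ (kids : List (Int × Int)) (acc : Int) (vis : PySem.Set Int),
      pvKids 0 t bd adj kids acc vis = (none, vis) := by
  intro kids
  induction kids with
  | nil => intro acc vis; rw [pvKids_nil]
  | cons hd tl ih =>
      intro acc vis
      obtain ⟨v, w⟩ := hd
      rw [pvKids_cons, pvVisit_zero]
      exact ih acc vis

-- visit only grows the visited set
lemma pv_visit_mono (t bd : Int) (adj : List (List (Int × Int))) :
    ∀ fuel,
      (∀ u acc vis, ∀ x ∈ vis, x ∈ (pvVisit fuel t bd adj u acc vis).2) ∧
      (∀ kids acc vis, ∀ x ∈ vis, x ∈ (pvKids fuel t bd adj kids acc vis).2) := by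
  intro fuel
  induction fuel with
  | zero =>
      refine ⟨fun u acc vis x hx => by rw [pvVisit_zero]; exact hx,
              fun kids acc vis x hx => by rw [pvKids_zero]; exact hx⟩
  | succ fuel ih =>
      have hv : ∀ u acc vis, ∀ x ∈ vis, x ∈ (pvVisit (fuel+1) t bd adj u acc vis).2 := by
        intro u acc vis x hx
        rw [pvVisit_succ]
        split
        · exact hx
        · split
          · exact hx
          · exact ih.2 _ _ _ x ((PySem.Set.mem_add vis u x).mpr (Or.inl hx))
      refine ⟨hv, ?_⟩
      intro kids
      induction kids with
      | nil => intro acc vis x hx; rw [pvKids_nil]; exact hx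
      | cons hd tl ihk =>
          intro acc vis x hx
          obtain ⟨v, w⟩ := hd
          rw [pvKids_cons]
          have h1 := hv v (if w < bd ∧ acc < w then w else acc) vis x hx
          rcases hres : (pvVisit (fuel+1) t bd adj v (if w < bd ∧ acc < w then w else acc) vis).1 with _ | y
          · simp only [hres]
            exact ihk _ _ x h1
          · simp only [hres]
            exact h1

-- visited places stay in range
lemma pv_visit_range (n t bd : Int) (adj : List (List (Int × Int)))
    (hlen : adj.length = n.toNat) (hadj : ∀ l ∈ adj, ∀ p ∈ l, pvInR n p.1) :
    ∀ fuel,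
      (∀ u acc vis, pvInR n u → (∀ v ∈ vis, pvInR n v) →
        ∀ x ∈ (pvVisit fuel t bd adj u acc vis).2, pvInR n x) ∧
      (∀ kids acc vis, (∀ p ∈ kids, pvInR n p.1) → (∀ v ∈ vis, pvInR n v) →
        ∀ x ∈ (pvKids fuel t bd adj kids acc vis).2, pvInR n x) := by
  have hkid_of : ∀ u, pvInR n u → ∀ p ∈ (PySem.List.pyGetD adj u []).reverse, pvInR n p.1 := by
    intro u hu p hp
    obtain ⟨h0, h1⟩ := hu
    have hmm : PySem.List.pyGetD adj u [] ∈ adj := by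
      rw [PySem.List.pyGetD_eq_getElem _ _ h0 (by omega)]
      exact List.getElem_mem _
    exact hadj _ hmm p (List.mem_reverse.mp hp)
  intro fuel
  induction fuel with
  | zero =>
      refine ⟨fun u acc vis _ hvis x hx => hvis x (by rwa [pvVisit_zero] at hx),
              fun kids acc vis _ hvis x hx => hvis x (by rwa [pvKids_zero] at hx)⟩
  | succ fuel ih =>
      have hv : ∀ u acc vis, pvInR n u → (∀ v ∈ vis, pvInR n v) →
          ∀ x ∈ (pvVisit (fuel+1) t bd adj u acc vis).2, pvInR n x := by
        intro u acc vis hu hvis x hx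
        rw [pvVisit_succ] at hx
        split at hx
        · exact hvis x hx
        · split at hx
          · exact hvis x hx
          · exact ih.2 _ _ _ (hkid_of u hu)
              (fun v hv' => by
                rcases (PySem.Set.mem_add vis u v).mp hv' with h1 | h1
                · exact hvis v h1
                · exact h1 ▸ hu) x hx
      refine ⟨hv, ?_⟩
      intro kids
      induction kids with
      | nil => intro acc vis _ hvis x hx; exact hvis x (by rwa [pvKids_nil] at hx)
      | cons hd tl ihk =>
          intro acc vis hks hvis x hx
          obtain ⟨v, w⟩ := hd
          rw [pvKids_cons] at hx
          have hvv : pvInR n v := hks (v, w) (List.mem_cons_self ..)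
          have hvis' : ∀ y ∈ (pvVisit (fuel+1) t bd adj v (if w < bd ∧ acc < w then w else acc) vis).2,
              pvInR n y := hv v _ vis hvv hvis
          rcases hres : (pvVisit (fuel+1) t bd adj v (if w < bd ∧ acc < w then w else acc) vis).1 with _ | y
          · rw [hres] at hx
            exact ihk _ _ (fun p hp => hks p (List.mem_cons_of_mem _ hp)) hvis' x hx
          · rw [hres] at hx
            exact hvis' x hx

lemma pv_visit_visited (fuel : Nat) (t bd : Int) (adj : List (List (Int × Int)))
    (u acc : Int) (vis : PySem.Set Int) (hu : u ∈ vis) (hut : u ≠ t) :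
    pvVisit fuel t bd adj u acc vis = (none, vis) := by
  cases fuel with
  | zero => rw [pvVisit_zero]
  | succ fuel => rw [pvVisit_succ, if_neg hut, if_pos hu]

lemma pv_kids_eq_seq (fuel : Nat) (t bd : Int) (adj : List (List (Int × Int))) :
    ∀ (kids : List (Int × Int)) (acc : Int) (vis : PySem.Set Int),
      pvKids fuel t bd adj kids acc vis =
        pvSeq fuel t bd adj
          (kids.map (fun p => (p.1, if p.2 < bd ∧ acc < p.2 then p.2 else acc))) vis := by
  intro kids
  induction kids with
  | nil => intro acc vis; rw [pvKids_nil]; rfl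
  | cons hd tl ih =>
      intro acc vis
      obtain ⟨v, w⟩ := hd
      rw [pvKids_cons]
      simp only [List.map_cons, pvSeq]
      rcases hres : (pvVisit fuel t bd adj v (if w < bd ∧ acc < w then w else acc) vis).1 with _ | y <;>
        simp only [hres, ih]

lemma pv_seq_append (fb : Nat) (t bd : Int) (adj : List (List (Int × Int))) :
    ∀ (xs ys : List (Int × Int)) (vis : PySem.Set Int),
      pvSeq fb t bd adj (xs ++ ys) vis =
        (match (pvSeq fb t bd adj xs vis).1 with
         | some x => (some x, (pvSeq fb t bd adj xs vis).2)
         | none => pvSeq fb t bd adj ys (pvSeq fb t bd adj xs vis).2) := by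
  intro xs
  induction xs with
  | nil => intro ys vis; simp [pvSeq]
  | cons hd tl ih =>
      intro ys vis
      obtain ⟨v, h⟩ := hd
      simp only [List.cons_append, pvSeq]
      rcases hres : (pvVisit fb t bd adj v h vis).1 with _ | y
      · simp only [hres, ih]
      · simp only [hres]

lemma pv_seq_skip (fb : Nat) (t bd : Int) (adj : List (List (Int × Int))) :
    ∀ (xs : List (Int × Int)) (vis vis0 : PySem.Set Int),
      (∀ x ∈ vis0, x ∈ vis) →
      (∀ p ∈ xs, p.1 ∈ vis0 → p.1 ≠ t) →
      pvSeq fb t bd adj xs vis =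
        pvSeq fb t bd adj (xs.filter (fun p => decide (p.1 ∉ vis0))) vis := by
  intro xs
  induction xs with
  | nil => intro vis vis0 _ _; rfl
  | cons hd tl ih =>
      intro vis vis0 hsub hnt
      obtain ⟨v, h⟩ := hd
      by_cases hv : v ∈ vis0
      · have hvt : v ≠ t := hnt (v, h) (List.mem_cons_self ..) hv
        have hvv : pvVisit fb t bd adj v h vis = (none, vis) :=
          pv_visit_visited fb t bd adj v h vis (hsub v hv) hvt
        simp only [List.filter_cons, pvSeq, hvv]
        rw [if_neg (by simpa using hv)]
        exact ih vis vis0 hsub (fun p hp => hnt p (List.mem_cons_of_mem _ hp))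
      · simp only [List.filter_cons]
        rw [if_pos (by simpa using hv)]
        simp only [pvSeq]
        rcases hres : (pvVisit fb t bd adj v h vis).1 with _ | y
        · simp only [hres]
          exact ih _ vis0
            (fun x hx => (pv_visit_mono t bd adj fb).1 v h vis x (hsub x hx))
            (fun p hp => hnt p (List.mem_cons_of_mem _ hp))
        · simp only [hres]


-- enough fuel: one more unit changes nothing
lemma pv_fuel_step (n t bd : Int) (adj : List (List (Int × Int)))
    (hlen : adj.length = n.toNat) (hadj : ∀ l ∈ adj, ∀ p ∈ l, pvInR n p.1) :
    ∀ f : Nat,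
      (∀ u acc vis, pvInR n u → (∀ v ∈ vis, pvInR n v) → pvUnvis n vis < f →
        pvVisit f t bd adj u acc vis = pvVisit (f+1) t bd adj u acc vis) ∧
      (∀ kids acc vis, (∀ p ∈ kids, pvInR n p.1) → (∀ v ∈ vis, pvInR n v) → pvUnvis n vis < f →
        pvKids f t bd adj kids acc vis = pvKids (f+1) t bd adj kids acc vis) := by
  have hkid_of : ∀ u, pvInR n u → ∀ p ∈ (PySem.List.pyGetD adj u []).reverse, pvInR n p.1 := by
    intro u hu p hp
    obtain ⟨h0, h1⟩ := hu
    have hmm : PySem.List.pyGetD adj u [] ∈ adj := by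
      rw [PySem.List.pyGetD_eq_getElem _ _ h0 (by omega)]
      exact List.getElem_mem _
    exact hadj _ hmm p (List.mem_reverse.mp hp)
  intro f
  induction f with
  | zero => exact ⟨fun _ _ _ _ _ h => absurd h (by omega), fun _ _ _ _ _ h => absurd h (by omega)⟩
  | succ f ih =>
      have hv : ∀ u acc vis, pvInR n u → (∀ v ∈ vis, pvInR n v) → pvUnvis n vis < f + 1 →
          pvVisit (f+1) t bd adj u acc vis = pvVisit (f+2) t bd adj u acc vis := by
        intro u acc vis hu hvis hfu
        rw [pvVisit_succ, pvVisit_succ]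
        split
        · rfl
        · split
          · rfl
          · rename_i hnt hnv
            apply ih.2
            · exact hkid_of u hu
            · intro v hv'
              rcases (PySem.Set.mem_add vis u v).mp hv' with h1 | h1
              · exact hvis v h1
              · exact h1 ▸ hu
            · have := pv_unvis_add n vis u hu hnv
              omega
      refine ⟨hv, ?_⟩
      intro kids
      induction kids with
      | nil => intro acc vis _ _ _; rw [pvKids_nil, pvKids_nil]
      | cons hd tl ihk =>
          intro acc vis hks hvis hfu
          obtain ⟨v, w⟩ := hd
          rw [pvKids_cons, pvKids_cons]
          have hvv : pvInR n v := hks (v, w) (List.mem_cons_self ..)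
          rw [← hv v (if w < bd ∧ acc < w then w else acc) vis hvv hvis hfu]
          rcases hres : (pvVisit (f+1) t bd adj v (if w < bd ∧ acc < w then w else acc) vis).1 with _ | y
          · simp only [hres]
            apply ihk _ _ (fun p hp => hks p (List.mem_cons_of_mem _ hp))
            · exact (pv_visit_range n t bd adj hlen hadj (f+1)).1 v _ vis hvv hvis
            · have hmono := (pv_visit_mono t bd adj (f+1)).1 v (if w < bd ∧ acc < w then w else acc) vis
              have := pv_unvis_anti n vis _ hmono
              omega
          · simp only [hres]

lemma pv_fuel_ge (n t bd : Int) (adj : List (List (Int × Int)))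
    (hlen : adj.length = n.toNat) (hadj : ∀ l ∈ adj, ∀ p ∈ l, pvInR n p.1)
    (u acc : Int) (vis : PySem.Set Int) (hu : pvInR n u) (hvis : ∀ v ∈ vis, pvInR n v) :
    ∀ (f k : Nat), pvUnvis n vis < f →
      pvVisit f t bd adj u acc vis = pvVisit (f + k) t bd adj u acc vis := by
  intro f k
  induction k with
  | zero => intro _; rfl
  | succ k ihk =>
      intro hf
      rw [ihk hf]
      have := (pv_fuel_step n t bd adj hlen hadj (f + k)).1 u acc vis hu hvis (by omega)
      rw [this]
      ring_nf

lemma pv_fuel_eq (n t bd : Int) (adj : List (List (Int × Int)))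
    (hlen : adj.length = n.toNat) (hadj : ∀ l ∈ adj, ∀ p ∈ l, pvInR n p.1)
    (u acc : Int) (vis : PySem.Set Int) (hu : pvInR n u) (hvis : ∀ v ∈ vis, pvInR n v)
    (f g : Nat) (hf : pvUnvis n vis < f) (hg : pvUnvis n vis < g) :
    pvVisit f t bd adj u acc vis = pvVisit g t bd adj u acc vis := by
  rcases le_total f g with h | h
  · rw [pv_fuel_ge n t bd adj hlen hadj u acc vis hu hvis f (g - f) hf]
    congr 1
    omega
  · rw [pv_fuel_ge n t bd adj hlen hadj u acc vis hu hvis g (f - g) hg]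
    congr 1
    omega

lemma pv_seq_fuel (n t bd : Int) (adj : List (List (Int × Int)))
    (hlen : adj.length = n.toNat) (hadj : ∀ l ∈ adj, ∀ p ∈ l, pvInR n p.1) :
    ∀ (xs : List (Int × Int)) (vis : PySem.Set Int) (f g : Nat),
      (∀ p ∈ xs, pvInR n p.1) → (∀ v ∈ vis, pvInR n v) →
      pvUnvis n vis < f → pvUnvis n vis < g →
      pvSeq f t bd adj xs vis = pvSeq g t bd adj xs vis := by
  intro xs
  induction xs with
  | nil => intro vis f g _ _ _ _; rfl
  | cons hd tl ih =>
      intro vis f g hxs hvis hf hg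
      obtain ⟨v, h⟩ := hd
      have hvv : pvInR n v := hxs (v, h) (List.mem_cons_self ..)
      simp only [pvSeq]
      rw [← pv_fuel_eq n t bd adj hlen hadj v h vis hvv hvis f g hf hg]
      rcases hres : (pvVisit f t bd adj v h vis).1 with _ | y
      · simp only [hres]
        apply ih
        · exact fun p hp => hxs p (List.mem_cons_of_mem _ hp)
        · exact (pv_visit_range n t bd adj hlen hadj f).1 v h vis hvv hvis
        · have hmono := (pv_visit_mono t bd adj f).1 v h vis
          have := pv_unvis_anti n vis _ hmono
          omega
        · have hmono := (pv_visit_mono t bd adj f).1 v h vis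
          have := pv_unvis_anti n vis _ hmono
          omega
      · simp only [hres]


lemma pv_push_shape (seen : List Int) (m bd h : Int) :
    ∀ (kids : List (Int × Int)) (rest : List (Int × Int)),
      pvPush seen m bd h kids rest =
        ((kids.filter (fun p => decide (PySem.List.pyGetD seen p.1 0 ≠ m))).map
          (fun p => (p.1, if p.2 < bd ∧ h < p.2 then p.2 else h))).reverse ++ rest := by
  intro kids
  induction kids with
  | nil => intro rest; rfl
  | cons hd tl ih =>
      intro rest
      obtain ⟨v, w⟩ := hd
      show pvPush seen m bd h ((v, w) :: tl) rest = _
      unfold pvPush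
      rw [List.foldl_cons]
      dsimp only
      by_cases hc : PySem.List.pyGetD seen v 0 ≠ m
      · rw [if_pos hc]
        have := ih ((v, if w < bd ∧ h < w then w else h) :: rest)
        unfold pvPush at this
        rw [this]
        rw [List.filter_cons,
            if_pos (show (decide (PySem.List.pyGetD seen (v, w).1 0 ≠ m)) = true by simpa using hc)]
        simp
      · rw [if_neg hc]
        have := ih rest
        unfold pvPush at this
        rw [this]
        rw [List.filter_cons,
            if_neg (show ¬ (decide (PySem.List.pyGetD seen (v, w).1 0 ≠ m)) = true by simpa using hc)]

lemma pv_mu_cons (n : Int) (adj : List (List (Int × Int))) (m : Int)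
    (p : Int × Int) (rest : List (Int × Int)) (seen : List Int) :
    pvMu n adj m (p :: rest) seen = pvMu n adj m rest seen + 1 := by
  simp [pvMu]; omega

lemma pv_mu_append (n : Int) (adj : List (List (Int × Int))) (m : Int)
    (xs rest : List (Int × Int)) (seen : List Int) :
    pvMu n adj m (xs ++ rest) seen = xs.length + pvMu n adj m rest seen := by
  simp [pvMu]; omega

lemma pv_mu_mark (n : Int) (adj : List (List (Int × Int))) (m : Int)
    (seen : List Int) (c : Int) (hc : pvInR n c) (hlen : seen.length = n.toNat)
    (hunm : PySem.List.pyGetD seen c 0 ≠ m) :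
    pvMu n adj m [] (PySem.List.pySetD seen c m) + (1 + pvDeg adj c) =
      pvMu n adj m [] seen := by
  obtain ⟨hc0, hc1⟩ := hc
  unfold pvMu
  simp only [List.length_nil, Nat.zero_add]
  have hcong : (PySem.List.pyRange 0 n 1).filter
      (fun v => decide (PySem.List.pyGetD (PySem.List.pySetD seen c m) v 0 ≠ m)) =
      ((PySem.List.pyRange 0 n 1).filter
        (fun v => decide (PySem.List.pyGetD seen v 0 ≠ m))).filter (fun v => decide (v ≠ c)) := by
    rw [List.filter_filter]
    apply List.filter_congr
    intro x hx
    obtain ⟨hx0, hx1⟩ := PySem.List.mem_pyRange_one.mp hx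
    rw [pv_gi_set seen x c m hx0 (by omega) hc0 (by omega)]
    by_cases hxc : x = c
    · subst hxc; simp
    · simp [hxc]
  rw [hcong]
  have hmem : c ∈ (PySem.List.pyRange 0 n 1).filter
      (fun v => decide (PySem.List.pyGetD seen v 0 ≠ m)) := by
    rw [List.mem_filter]
    exact ⟨PySem.List.mem_pyRange_one.mpr ⟨hc0, hc1⟩, by simpa using hunm⟩
  have hnd : ((PySem.List.pyRange 0 n 1).filter
      (fun v => decide (PySem.List.pyGetD seen v 0 ≠ m))).Nodup :=
    (PySem.List.nodup_pyRange_one 0 n).filter _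
  have h7 := pv_sum_remove _ c (fun v => 1 + pvDeg adj v) hnd hmem
  have hbeta : (fun v => 1 + pvDeg adj v) c = 1 + pvDeg adj c := rfl
  omega

-- the stack machine simulates the sequential run of the recursive search
lemma pv_sim (n t bd m : Int) (adj : List (List (Int × Int)))
    (hlen : adj.length = n.toNat) (hadj : ∀ l ∈ adj, ∀ p ∈ l, pvInR n p.1) :
    ∀ (fuelA : Nat) (stack : List (Int × Int)) (seen : List Int) (vis : PySem.Set Int),
      seen.length = n.toNat →
      (∀ p ∈ stack, pvInR n p.1) →
      (∀ v ∈ vis, pvInR n v) →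
      (∀ v, pvInR n v → (PySem.List.pyGetD seen v 0 = m ↔ v ∈ vis)) →
      t ∉ vis →
      pvMu n adj m stack seen ≤ fuelA →
      (pvFlbLoop fuelA stack t bd adj seen m).1 =
        (match (pvSeq (n.toNat + 1) t bd adj stack vis).1 with
         | none => -1 | some x => x) ∧
      (pvFlbLoop fuelA stack t bd adj seen m).2.length = n.toNat ∧
      (∀ v, pvInR n v →
        (PySem.List.pyGetD (pvFlbLoop fuelA stack t bd adj seen m).2 v 0 = m ∨
         PySem.List.pyGetD (pvFlbLoop fuelA stack t bd adj seen m).2 v 0 =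
           PySem.List.pyGetD seen v 0)) := by
  intro fuelA
  induction fuelA with
  | zero =>
      intro stack seen vis hseen hstack hvis hrel htv hmu
      have hstack0 : stack = [] := by
        cases stack with
        | nil => rfl
        | cons hd tl => exfalso; rw [pv_mu_cons] at hmu; omega
      subst hstack0
      rw [pvFlbLoop_zero]
      exact ⟨by simp [pvSeq], hseen, fun v _ => Or.inr rfl⟩
  | succ fA ih =>
      intro stack seen vis hseen hstack hvis hrel htv hmu
      match stack with
      | [] =>
          rw [pvFlbLoop_nil]
          exact ⟨by simp [pvSeq], hseen, fun v _ => Or.inr rfl⟩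
      | (c, h) :: rest =>
          have hcR : pvInR n c := hstack (c, h) (List.mem_cons_self ..)
          have hcR0 : 0 ≤ c := hcR.1
          have hcR1 : c < n := hcR.2
          by_cases hct : c = t
          · -- the target is popped: both sides stop with h
            subst hct
            have hA : pvFlbLoop (fA+1) ((c, h) :: rest) c bd adj seen m = (h, seen) := by
              rw [pvFlbLoop_cons, if_pos rfl]
            have hB : pvSeq (n.toNat + 1) c bd adj ((c, h) :: rest) vis = (some h, vis) := by
              simp [pvSeq, pvVisit_succ]
            rw [hA, hB]
            exact ⟨rfl, hseen, fun v _ => Or.inr rfl⟩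
          · by_cases hcm : PySem.List.pyGetD seen c 0 = m
            · -- already visited: both sides skip the frame
              have hcv : c ∈ vis := (hrel c hcR).mp hcm
              have hA : pvFlbLoop (fA+1) ((c, h) :: rest) t bd adj seen m =
                  pvFlbLoop fA rest t bd adj seen m := by
                rw [pvFlbLoop_cons, if_neg hct, if_pos hcm]
              have hB : pvSeq (n.toNat + 1) t bd adj ((c, h) :: rest) vis =
                  pvSeq (n.toNat + 1) t bd adj rest vis := by
                simp only [pvSeq, pv_visit_visited _ t bd adj c h vis hcv hct]
              rw [hA, hB]
              exact ih rest seen vis hseen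
                (fun p hp => hstack p (List.mem_cons_of_mem _ hp)) hvis hrel htv
                (by rw [pv_mu_cons] at hmu; omega)
            · -- expand c
              have hcv : c ∉ vis := fun hcv => hcm ((hrel c hcR).mpr hcv)
              set seen' := PySem.List.pySetD seen c m with hseen'def
              set vis' := PySem.Set.add vis c with hvis'def
              set kids := PySem.List.pyGetD adj c [] with hkidsdef
              have hkidsR : ∀ p ∈ kids, pvInR n p.1 := by
                intro p hp
                obtain ⟨h0, h1⟩ := hcR
                have hmm : PySem.List.pyGetD adj c [] ∈ adj := by
                  rw [PySem.List.pyGetD_eq_getElem _ _ h0 (by omega)]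
                  exact List.getElem_mem _
                exact hadj _ hmm p (hkidsdef ▸ hp)
              have hseen'len : seen'.length = n.toNat := by
                rw [hseen'def, PySem.List.length_pySetD]; exact hseen
              have hvis'R : ∀ v ∈ vis', pvInR n v := by
                intro v hv
                rcases (PySem.Set.mem_add vis c v).mp (by rwa [hvis'def] at hv) with h1 | h1
                · exact hvis v h1
                · exact h1 ▸ hcR
              have hrel' : ∀ v, pvInR n v →
                  (PySem.List.pyGetD seen' v 0 = m ↔ v ∈ vis') := by
                intro v hv
                obtain ⟨hv0, hv1⟩ := hv
                rw [hseen'def, pv_gi_set seen v c m hv0 (by omega) hcR.1 (by omega),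
                    hvis'def]
                by_cases hvc : v = c
                · subst hvc; simp [PySem.Set.mem_add]
                · rw [if_neg hvc]
                  rw [PySem.Set.mem_add]
                  constructor
                  · intro hh; exact Or.inl ((hrel v ⟨hv0, hv1⟩).mp hh)
                  · intro hh
                    rcases hh with h1 | h1
                    · exact (hrel v ⟨hv0, hv1⟩).mpr h1
                    · exact absurd h1 hvc
              have htv' : t ∉ vis' := by
                rw [hvis'def]
                intro hh
                rcases (PySem.Set.mem_add vis c t).mp hh with h1 | h1
                · exact htv h1
                · exact hct (h1.symm)
              -- the A side
              have hA : pvFlbLoop (fA+1) ((c, h) :: rest) t bd adj seen m =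
                  pvFlbLoop fA (pvPush seen' m bd h kids rest) t bd adj seen' m := by
                rw [pvFlbLoop_cons, if_neg hct, if_neg hcm]
              -- the B side
              have hn1 : 0 < n.toNat := by obtain ⟨h0, h1⟩ := hcR; omega
              have hunvis' : pvUnvis n vis' + 1 = pvUnvis n vis :=
                hvis'def ▸ pv_unvis_add n vis c hcR hcv
              have hunvis_le := pv_unvis_le n vis
              have hB1 : pvVisit (n.toNat + 1) t bd adj c h vis =
                  pvKids n.toNat t bd adj kids.reverse h vis' := by
                rw [pvVisit_succ, if_neg hct, if_neg (by simpa using hcv)]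
              have hB2 : pvKids n.toNat t bd adj kids.reverse h vis' =
                  pvSeq n.toNat t bd adj (kids.reverse.map (fun p => (p.1, if p.2 < bd ∧ h < p.2 then p.2 else h))) vis' :=
                pv_kids_eq_seq n.toNat t bd adj kids.reverse h vis'
              have hB3 : pvSeq n.toNat t bd adj (kids.reverse.map (fun p => (p.1, if p.2 < bd ∧ h < p.2 then p.2 else h))) vis' =
                  pvSeq (n.toNat + 1) t bd adj (kids.reverse.map (fun p => (p.1, if p.2 < bd ∧ h < p.2 then p.2 else h))) vis' := by
                apply pv_seq_fuel n t bd adj hlen hadj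
                · intro p hp
                  obtain ⟨q, hq, he⟩ := List.mem_map.mp hp
                  rw [← he]
                  exact hkidsR q (List.mem_reverse.mp hq)
                · exact hvis'R
                · omega
                · omega
              have hskip : pvSeq (n.toNat + 1) t bd adj (kids.reverse.map (fun p => (p.1, if p.2 < bd ∧ h < p.2 then p.2 else h))) vis' =
                  pvSeq (n.toNat + 1) t bd adj ((kids.reverse.map (fun p => (p.1, if p.2 < bd ∧ h < p.2 then p.2 else h))).filter
                    (fun p => decide (p.1 ∉ vis'))) vis' := by
                apply pv_seq_skip
                · exact fun x hx => hx
                · intro p hp hpv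
                  exact fun he => htv' (he ▸ hpv)
              have hfiltereq : (kids.reverse.map (fun p => (p.1, if p.2 < bd ∧ h < p.2 then p.2 else h))).filter (fun p => decide (p.1 ∉ vis')) =
                  ((kids.filter (fun p => decide (PySem.List.pyGetD seen' p.1 0 ≠ m))).map
                    (fun p => (p.1, if p.2 < bd ∧ h < p.2 then p.2 else h))).reverse := by
                rw [List.map_reverse, List.filter_reverse, List.filter_map]
                congr 1
                have hpc : ∀ p ∈ kids,
                    ((fun p => decide (p.1 ∉ vis')) ∘ (fun p => (p.1, if p.2 < bd ∧ h < p.2 then p.2 else h))) p =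
                      decide (PySem.List.pyGetD seen' p.1 0 ≠ m) := by
                  intro p hp
                  have hpR : pvInR n p.1 := hkidsR p hp
                  simp only [Function.comp, decide_eq_decide]
                  exact (not_congr (hrel' p.1 hpR)).symm
                rw [List.filter_congr hpc]
              have hpush := pv_push_shape seen' m bd h kids rest
              have hVis : pvVisit (n.toNat + 1) t bd adj c h vis =
                  pvSeq (n.toNat + 1) t bd adj
                    (((kids.filter (fun p => decide (PySem.List.pyGetD seen' p.1 0 ≠ m))).map
                      (fun p => (p.1, if p.2 < bd ∧ h < p.2 then p.2 else h))).reverse) vis' := by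
                rw [hB1, hB2, hB3, hskip, hfiltereq]
              have hBeq : pvSeq (n.toNat + 1) t bd adj ((c, h) :: rest) vis =
                  pvSeq (n.toNat + 1) t bd adj (pvPush seen' m bd h kids rest) vis' := by
                rw [hpush]
                rw [pv_seq_append]
                simp only [pvSeq, hVis]
              -- fuel accounting
              have hstack' : ∀ p ∈ pvPush seen' m bd h kids rest, pvInR n p.1 := by
                rw [hpush]
                intro p hp
                rcases List.mem_append.mp hp with h1 | h1
                · obtain ⟨q, hq, he⟩ := List.mem_map.mp (List.mem_reverse.mp h1)
                  rw [← he]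
                  exact hkidsR q (List.mem_filter.mp hq).1
                · exact hstack p (List.mem_cons_of_mem _ h1)
              have hmu' : pvMu n adj m (pvPush seen' m bd h kids rest) seen' ≤ fA := by
                have e1 : pvMu n adj m ((c, h) :: rest) seen = pvMu n adj m rest seen + 1 :=
                  pv_mu_cons n adj m (c, h) rest seen
                have e2 : pvMu n adj m rest seen = rest.length + pvMu n adj m [] seen := by
                  have := pv_mu_append n adj m rest [] seen
                  rwa [List.append_nil] at this
                have e3 := pv_mu_mark n adj m seen c hcR hseen hcm
                rw [← hseen'def] at e3
                have e4 : pvMu n adj m (pvPush seen' m bd h kids rest) seen' =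
                    ((kids.filter (fun p => decide (PySem.List.pyGetD seen' p.1 0 ≠ m))).map
                      (fun p => (p.1, if p.2 < bd ∧ h < p.2 then p.2 else h))).reverse.length + pvMu n adj m rest seen' := by
                  rw [hpush, pv_mu_append]
                have e5 : pvMu n adj m rest seen' = rest.length + pvMu n adj m [] seen' := by
                  have := pv_mu_append n adj m rest [] seen'
                  rwa [List.append_nil] at this
                have e6 : ((kids.filter (fun p => decide (PySem.List.pyGetD seen' p.1 0 ≠ m))).map
                    (fun p => (p.1, if p.2 < bd ∧ h < p.2 then p.2 else h))).reverse.length ≤ pvDeg adj c := by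
                  rw [List.length_reverse, List.length_map]
                  calc (kids.filter _).length ≤ kids.length := List.length_filter_le _ _
                    _ = pvDeg adj c := by rw [hkidsdef]; rfl
                omega
              have := ih (pvPush seen' m bd h kids rest) seen' vis'
                hseen'len hstack' hvis'R hrel' htv' hmu'
              rw [hA, hBeq]
              refine ⟨this.1, this.2.1, ?_⟩
              intro v hv
              rcases this.2.2 v hv with h1 | h1
              · exact Or.inl h1
              · obtain ⟨hv0, hv1⟩ := hv
                rw [hseen'def, pv_gi_set seen v c m hv0 (by omega) hcR.1 (by omega)] at h1
                by_cases hvc : v = c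
                · rw [if_pos hvc] at h1; exact Or.inl h1
                · rw [if_neg hvc] at h1; exact Or.inr h1


lemma pv_sum_getD (g : List (Int × Int) → Nat) :
    ∀ (l : List (List (Int × Int))),
      ((List.range l.length).map (fun k => g (l.getD k []))).sum = (l.map g).sum := by
  intro l
  induction l using List.reverseRecOn with
  | nil => simp
  | append_singleton l x ih =>
      rw [List.length_append, List.length_singleton, List.range_succ]
      rw [List.map_append, List.sum_append, List.map_append, List.sum_append]
      congr 1
      · rw [← ih]
        apply congrArg
        apply List.map_congr_left
        intro k hk
        have hk' : k < l.length := List.mem_range.mp hk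
        congr 1
        rw [List.getD_eq_getElem?_getD, List.getD_eq_getElem?_getD,
            List.getElem?_append_left hk']
      · simp [List.getD_eq_getElem?_getD, List.getElem?_append_right]

lemma pv_sum_one_add (l : List Int) (g : Int → Nat) :
    (l.map (fun v => 1 + g v)).sum = l.length + (l.map g).sum := by
  induction l with
  | nil => simp
  | cons hd tl ih => simp [ih]; omega

lemma pv_flb_eq (n t bd m : Int) (adj : List (List (Int × Int)))
    (hlen : adj.length = n.toNat) (hadj : ∀ l ∈ adj, ∀ p ∈ l, pvInR n p.1)
    (seen : List Int) (hseen : seen.length = n.toNat)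
    (hfresh : ∀ v, pvInR n v → PySem.List.pyGetD seen v 0 ≠ m) (u : Int) (hu : pvInR n u) :
    (pvFlb u t bd adj seen m).1 =
      (match (pvVisit (n.toNat + 1) t bd adj u (-1) []).1 with
       | none => -1 | some x => x) ∧
    (pvFlb u t bd adj seen m).2.length = n.toNat ∧
    (∀ v, pvInR n v →
      (PySem.List.pyGetD (pvFlb u t bd adj seen m).2 v 0 = m ∨
       PySem.List.pyGetD (pvFlb u t bd adj seen m).2 v 0 = PySem.List.pyGetD seen v 0)) := by
  have hmu : pvMu n adj m [(u, -1)] seen ≤ 1 + seen.length + (adj.map List.length).sum := by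
    unfold pvMu
    have h1 : (((PySem.List.pyRange 0 n 1).filter
        (fun v => decide (PySem.List.pyGetD seen v 0 ≠ m))).map (fun v => 1 + pvDeg adj v)).sum
        ≤ ((PySem.List.pyRange 0 n 1).map (fun v => 1 + pvDeg adj v)).sum := by
      apply List.Sublist.sum_le_sum
      · exact List.Sublist.map _ List.filter_sublist
      · intro x _; omega
    have h2 := pv_sum_one_add (PySem.List.pyRange 0 n 1) (pvDeg adj)
    have h3 : ((PySem.List.pyRange 0 n 1).map (pvDeg adj)).sum =
        (adj.map List.length).sum := by
      rw [PySem.List.pyRange_one]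
      rw [List.map_map]
      have hcomp : (pvDeg adj ∘ fun k : Nat => (0 : Int) + ↑k) =
          fun k : Nat => (adj.getD k []).length := by
        funext k
        simp [pvDeg, PySem.List.pyGetD_natCast]
      rw [hcomp]
      have h4 := pv_sum_getD List.length adj
      rw [hlen] at h4
      simpa using h4
    have h5 : (PySem.List.pyRange 0 n 1).length = n.toNat := by
      rw [PySem.List.length_pyRange_one]; simp
    simp only [List.length_singleton]
    omega
  have hstack : ∀ p ∈ [((u : Int), (-1 : Int))], pvInR n p.1 := by
    intro p hp
    rw [List.mem_singleton] at hp
    rw [hp]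
    exact hu
  have hrel : ∀ v, pvInR n v →
      (PySem.List.pyGetD seen v 0 = m ↔ v ∈ ([] : PySem.Set Int)) := by
    intro v hv
    constructor
    · intro hh; exact absurd hh (hfresh v hv)
    · intro hh; exact absurd hh (List.not_mem_nil)
  have hsim := pv_sim n t bd m adj hlen hadj
    (1 + seen.length + (adj.map List.length).sum) [(u, -1)] seen [] hseen hstack
    (fun v hv => absurd hv (List.not_mem_nil)) hrel (List.not_mem_nil) hmu
  have hseq1 : (pvSeq (n.toNat + 1) t bd adj [(u, -1)] ([] : PySem.Set Int)).1 =
      (pvVisit (n.toNat + 1) t bd adj u (-1) []).1 := by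
    rcases hv : (pvVisit (n.toNat + 1) t bd adj u (-1) []).1 with _ | y <;>
      simp [pvSeq, hv]
  unfold pvFlb
  rw [hseq1] at hsim
  exact hsim


def pvMinUpd (alt : Option Int) (cand : Int) : Int :=
  match alt with
  | none => cand
  | some v => min v cand

lemma pv_opt_update (total cand : Int) :
    ∀ (best : Option Int),
      (match best with
       | none => if cand > total then some cand else best
       | some v => if cand > total ∧ cand < v then some cand else best)
      = (if cand > total then some (pvMinUpd best cand) else best) := by
  intro best
  cases best with
  | none => rfl
  | some v =>
      show (if cand > total ∧ cand < v then some cand else some v) = _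
      by_cases hc : cand > total
      · by_cases h2 : cand < v
        · rw [if_pos (show cand > total ∧ cand < v from ⟨hc, h2⟩), if_pos hc]
          show _ = some (min v cand)
          rw [min_eq_right h2.le]
        · rw [if_neg (fun hand => h2 hand.2), if_pos hc]
          show _ = some (min v cand)
          rw [min_eq_left (by omega : v ≤ cand)]
      · rw [if_neg (fun hand => hc hand.1), if_neg hc]

lemma pv_run2 (n total : Int) (G : List (List (Int × Int))) (taken : List Bool)
    (hG : G.length = n.toNat) (hGR : ∀ l ∈ G, ∀ p ∈ l, pvInR n p.1) :
    ∀ (rest : List (Int × Int × Int)) (dsr : List Bool) (idx0 : Nat) (qa : PvQA) (best : Option Int),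
      dsr.length = rest.length →
      (∀ j, j < rest.length →
        PySem.List.pyGetD taken ((idx0 : Int) + (j : Int)) false = dsr.getD j false) →
      (∀ e ∈ rest, pvInR n e.2.1 ∧ pvInR n e.2.2) →
      qa.idx = (idx0 : Int) →
      qa.seen.length = n.toNat →
      (∀ v, pvInR n v → PySem.List.pyGetD qa.seen v 0 ≤ qa.counter) →
      qa.alt = best →
      (rest.foldl (pvStepA2 taken total G) qa).alt =
        (pvZipNeg rest dsr).foldl (pvStepB2 total n G) best := by
  intro rest
  induction rest with
  | nil =>
      intro dsr idx0 qa best _ _ _ _ _ _ halt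
      simpa [pvZipNeg] using halt
  | cons e rest ih =>
      intro dsr idx0 qa best hlen2 hread hre hidx hseen hctr halt
      cases dsr with
      | nil => simp at hlen2
      | cons d dsr =>
          have hread0 : PySem.List.pyGetD taken qa.idx false = d := by
            have := hread 0 (by simp)
            simpa [hidx] using this
          have hreadS : ∀ j, j < rest.length →
              PySem.List.pyGetD taken (((idx0 + 1 : Nat) : Int) + (j : Int)) false =
                dsr.getD j false := by
            intro j hj
            have := hread (j + 1) (by simp; omega)
            have harith : ((idx0 : Int) + ((j : Nat) + 1 : Nat)) = ((idx0 + 1 : Nat) : Int) + (j : Int) := by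
              push_cast; ring
            rw [harith] at this
            simpa using this
          have hlen2' : dsr.length = rest.length := by simpa using hlen2
          have hre' : ∀ e' ∈ rest, pvInR n e'.2.1 ∧ pvInR n e'.2.2 :=
            fun e' he' => hre e' (List.mem_cons_of_mem _ he')
          rw [List.foldl_cons]
          cases d with
          | true =>
              have hA2 : pvStepA2 taken total G qa e = { qa with idx := qa.idx + 1 } := by
                unfold pvStepA2
                rw [hread0]
                simp
              have hZ : pvZipNeg (e :: rest) (true :: dsr) = pvZipNeg rest dsr := by
                simp [pvZipNeg]
              rw [hA2, hZ]
              exact ih dsr (idx0 + 1) _ best hlen2' hreadS hre'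
                (by show qa.idx + 1 = _; rw [hidx]; push_cast; ring) hseen hctr halt
          | false =>
              obtain ⟨ha, hb⟩ := hre e (List.mem_cons_self ..)
              have hfresh : ∀ v, pvInR n v →
                  PySem.List.pyGetD qa.seen v 0 ≠ qa.counter + 1 := by
                intro v hv
                have := hctr v hv
                omega
              have hflb := pv_flb_eq n e.2.2 e.1 (qa.counter + 1) G hG hGR qa.seen hseen
                hfresh e.2.1 ha
              have hZ : pvZipNeg (e :: rest) (false :: dsr) = e :: pvZipNeg rest dsr := by
                simp [pvZipNeg]
              rw [hZ, List.foldl_cons]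
              -- the updated A state in each case has the same seen/counter/idx
              have hseen' : (pvFlb e.2.1 e.2.2 e.1 G qa.seen (qa.counter + 1)).2.length = n.toNat :=
                hflb.2.1
              have hctr' : ∀ v, pvInR n v →
                  PySem.List.pyGetD (pvFlb e.2.1 e.2.2 e.1 G qa.seen (qa.counter + 1)).2 v 0 ≤
                    qa.counter + 1 := by
                intro v hv
                rcases hflb.2.2 v hv with h1 | h1
                · omega
                · have := hctr v hv; omega
              have hstepB : ∀ b, pvStepB2 total n G b e =
                  (match (pvVisit (n.toNat + 1) e.2.2 e.1 G e.2.1 (-1) []).1 with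
                   | none => b
                   | some mv =>
                     if mv ≠ -1 then
                       let cand := total - mv + e.1
                       match b with
                       | none => if cand > total then some cand else b
                       | some v => if cand > total ∧ cand < v then some cand else b
                     else b) := by
                intro b
                unfold pvStepB2
                rfl
              rcases hmb : (pvVisit (n.toNat + 1) e.2.2 e.1 G e.2.1 (-1) []).1 with _ | mv
              · -- not found: A computes -1, both keep their best
                have hr1 : (pvFlb e.2.1 e.2.2 e.1 G qa.seen (qa.counter + 1)).1 = -1 := by
                  rw [hflb.1, hmb]
                have hA2 : pvStepA2 taken total G qa e =
                    { counter := qa.counter + 1,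
                      seen := (pvFlb e.2.1 e.2.2 e.1 G qa.seen (qa.counter + 1)).2,
                      alt := qa.alt, idx := qa.idx + 1 } := by
                  unfold pvStepA2
                  rw [hread0]
                  simp only [Bool.false_eq_true, if_false, hr1]
                  simp
                have hB2 : pvStepB2 total n G best e = best := by
                  rw [hstepB, hmb]
                rw [hA2, hB2]
                exact ih dsr (idx0 + 1) _ best hlen2' hreadS hre'
                  (by show qa.idx + 1 = _; rw [hidx]; push_cast; ring) hseen' hctr' halt
              · have hr1 : (pvFlb e.2.1 e.2.2 e.1 G qa.seen (qa.counter + 1)).1 = mv := by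
                  rw [hflb.1, hmb]
                by_cases hmv : mv = -1
                · have hA2 : pvStepA2 taken total G qa e =
                      { counter := qa.counter + 1,
                        seen := (pvFlb e.2.1 e.2.2 e.1 G qa.seen (qa.counter + 1)).2,
                        alt := qa.alt, idx := qa.idx + 1 } := by
                    unfold pvStepA2
                    rw [hread0]
                    simp only [Bool.false_eq_true, if_false, hr1, hmv]
                    simp
                  have hB2 : pvStepB2 total n G best e = best := by
                    rw [hstepB, hmb]
                    simp [hmv]
                  rw [hA2, hB2]
                  exact ih dsr (idx0 + 1) _ best hlen2' hreadS hre'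
                    (by show qa.idx + 1 = _; rw [hidx]; push_cast; ring) hseen' hctr' halt
                · -- a real candidate
                  have hA2 : pvStepA2 taken total G qa e =
                      { counter := qa.counter + 1,
                        seen := (pvFlb e.2.1 e.2.2 e.1 G qa.seen (qa.counter + 1)).2,
                        alt := if total - mv + e.1 > total then
                                 some (pvMinUpd qa.alt (total - mv + e.1))
                               else qa.alt,
                        idx := qa.idx + 1 } := by
                    unfold pvStepA2
                    rw [hread0]
                    simp only [Bool.false_eq_true, if_false, hr1]
                    rw [if_pos hmv]
                    by_cases hc : total - mv + e.1 > total <;> simp [hc, pvMinUpd]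
                  have hB2 : pvStepB2 total n G best e =
                      (if total - mv + e.1 > total then
                         some (pvMinUpd best (total - mv + e.1))
                       else best) := by
                    rw [hstepB, hmb]
                    simp only [ne_eq, hmv, not_false_eq_true, if_true]
                    exact pv_opt_update total (total - mv + e.1) best
                  rw [hA2, hB2]
                  exact ih dsr (idx0 + 1) _ _ hlen2' hreadS hre'
                    (by show qa.idx + 1 = _; rw [hidx]; push_cast; ring) hseen' hctr' (by simp [halt])


-- ---------- putting everything together ----------
lemma pv_main (n : Int) (es : List (Int × Int × Int))
    (hpre : ∀ e ∈ pvSortEdges es,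
      (0 ≤ e.2.1 ∧ e.2.1 < n) ∧ (0 ≤ e.2.2 ∧ e.2.2 < n)) :
    second_best_tree n es = second_best_tree_alt n es := by
  unfold second_best_tree second_best_tree_alt
  dsimp only
  set S := pvSortEdges es with hSdef
  have hre : ∀ e ∈ S, pvInR n e.2.1 ∧ pvInR n e.2.2 := by
    intro e he
    obtain ⟨⟨h1, h2⟩, h3, h4⟩ := hpre e he
    exact ⟨⟨h1, h2⟩, ⟨h3, h4⟩⟩
  have hlenR : (PySem.List.pyRange 0 n 1).length = n.toNat := by
    rw [PySem.List.length_pyRange_one]; simp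
  have hUF0 : pvUF n (PySem.List.pyRange 0 n 1) (PySem.List.pyRange 0 n 1) := by
    refine ⟨hlenR, hlenR, ?_, ?_, ?_, ?_⟩
    · intro x hx
      obtain ⟨h0, h1⟩ := hx
      rw [pv_gi_range n x h0 h1]
      exact ⟨h0, h1⟩
    · intro x hx
      obtain ⟨h0, h1⟩ := hx
      rw [pv_gi_range n x h0 h1, pv_gi_range n x h0 h1]
    · intro x y hx hy _ _ hl
      obtain ⟨h0, h1⟩ := hx
      obtain ⟨h2, h3⟩ := hy
      rwa [pv_gi_range n x h0 h1, pv_gi_range n y h2 h3] at hl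
    · intro x hx
      exact ⟨0, pv_count_pos n _ hlenR x hx, by
        obtain ⟨h0, h1⟩ := hx
        show PySem.List.pyGetD _ x 0 = x
        exact pv_gi_range n x h0 h1⟩
  have hT0 : pvTreeOK n ((PySem.List.pyRange 0 n 1).map (fun _ => [])) := by
    constructor
    · rw [List.length_map]; exact hlenR
    · intro l hl p hp
      obtain ⟨_, _, rfl⟩ := List.mem_map.mp hl
      cases hp
  have htk0 : PySem.List.pyRepeat [false] (PySem.List.len S) =
      ([] : List Bool) ++ List.replicate (S.length - ([] : List Bool).length) false := by
    rw [PySem.List.pyRepeat_singleton, PySem.List.len_eq]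
    simp
  obtain ⟨dsn, hl1, hl2, hl3, hl4, hl5, hl6⟩ :=
    pv_run1 n S.length S ([] : List Bool)
      { L := PySem.List.pyRange 0 n 1, D := PySem.List.pyRepeat [1] n, total := 0,
        tree := (PySem.List.pyRange 0 n 1).map (fun _ => []),
        taken := PySem.List.pyRepeat [false] (PySem.List.len S), idx := 0 }
      { comp := PySem.List.pyRange 0 n 1, total := 0,
        adj := (PySem.List.pyRange 0 n 1).map (fun _ => []), used := 0, extras := [] }
      hre
      ⟨hUF0, by rw [PySem.List.pyRepeat_singleton, List.length_replicate], rfl, rfl, hT0⟩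
      htk0 (by simp) (by simp) (by simp)
  set stA := S.foldl pvStepA
      { L := PySem.List.pyRange 0 n 1, D := PySem.List.pyRepeat [1] n, total := 0,
        tree := (PySem.List.pyRange 0 n 1).map (fun _ => []),
        taken := PySem.List.pyRepeat [false] (PySem.List.len S), idx := 0 } with hstA
  set stB := S.foldl pvStepB
      { comp := PySem.List.pyRange 0 n 1, total := 0,
        adj := (PySem.List.pyRange 0 n 1).map (fun _ => []), used := 0, extras := [] } with hstB
  obtain ⟨hUFf, hDf, htotf, htreef, htokf⟩ := hl6
  have htkf : stA.taken = dsn := by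
    rw [hl2]; simp
  have hcnt : ((stA.taken.count true : Nat) : Int) = stB.used := by
    rw [htkf]
    simpa using hl4
  have hlen1 : dsn.length = S.length := by simpa using hl1
  -- the two feasibility tests agree
  by_cases hfeas : ((stA.taken.count true : Nat) : Int) ≠ n - 1
  · rw [if_pos hfeas, if_pos (by rw [← hcnt]; exact hfeas)]
  · rw [if_neg hfeas, if_neg (by rw [← hcnt]; exact hfeas)]
    -- phase 2
    have hseen0len : (PySem.List.pyRepeat [(0 : Int)] n).length = n.toNat := by
      rw [PySem.List.pyRepeat_singleton, List.length_replicate]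
    have hread : ∀ j, j < S.length →
        PySem.List.pyGetD stA.taken (((0 : Nat) : Int) + (j : Int)) false = dsn.getD j false := by
      intro j hj
      rw [htkf]
      have : (((0 : Nat) : Int) + (j : Int)) = ((j : Nat) : Int) := by push_cast; ring
      rw [this, PySem.List.pyGetD_natCast]
    have hctr0 : ∀ v, pvInR n v →
        PySem.List.pyGetD (PySem.List.pyRepeat [(0 : Int)] n) v 0 ≤ 1 := by
      intro v hv
      obtain ⟨h0, h1⟩ := hv
      rw [PySem.List.pyRepeat_singleton,
          PySem.List.pyGetD_eq_getElem _ _ h0 (by rw [List.length_replicate]; omega)]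
      rw [List.getElem_replicate]
      omega
    have hrun2 := pv_run2 n stA.total stA.tree stA.taken htokf.1 htokf.2
      S dsn 0
      { counter := 1, seen := PySem.List.pyRepeat [(0 : Int)] n, alt := none, idx := 0 }
      none hlen1 hread hre (by simp) hseen0len hctr0 rfl
    have hextras : stB.extras = pvZipNeg S dsn := by
      rw [hl5]; simp
    rw [hextras, ← htreef, ← htotf]
    rw [hrun2]

lemma pv_takenlen (l : List (Int × Int × Int)) :
    ∀ st : PvStA, ((l.foldl pvStepA st).taken).length = st.taken.length := by
  induction l with
  | nil => intro st; rfl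
  | cons e tl ih =>
      intro st
      rw [List.foldl_cons, ih]
      unfold pvStepA
      dsimp only
      split <;> simp [PySem.List.length_pySetD]

lemma pv_usedle (l : List (Int × Int × Int)) :
    ∀ st : PvStB, (l.foldl pvStepB st).used ≤ st.used + l.length := by
  induction l with
  | nil => intro st; simp
  | cons e tl ih =>
      intro st
      rw [List.foldl_cons]
      have h1 := ih (pvStepB st e)
      have h2 : (pvStepB st e).used ≤ st.used + 1 := by
        unfold pvStepB
        dsimp only
        split <;> simp
      simp only [List.length_cons]
      push_cast at h1 ⊢
      omega

-- too few edges: both sides fail the feasibility test and answer -1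
lemma pv_trivial (n : Int) (es : List (Int × Int × Int))
    (hlen : (es.length : Int) < n - 1) :
    second_best_tree n es = -1 ∧ second_best_tree_alt n es = -1 := by
  unfold second_best_tree second_best_tree_alt
  dsimp only
  have hSlen : (pvSortEdges es).length = es.length := by
    unfold pvSortEdges
    exact (PySem.List.sorted2_perm es _ _ false).length_eq
  constructor
  · rw [if_pos ?_]
    have h1 := pv_takenlen (pvSortEdges es)
      { L := PySem.List.pyRange 0 n 1, D := PySem.List.pyRepeat [1] n, total := 0,
        tree := (PySem.List.pyRange 0 n 1).map (fun _ => []),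
        taken := PySem.List.pyRepeat [false] (PySem.List.len (pvSortEdges es)), idx := 0 }
    have h2 : (PySem.List.pyRepeat [false] (PySem.List.len (pvSortEdges es))).length =
        es.length := by
      rw [PySem.List.pyRepeat_singleton, PySem.List.len_eq, List.length_replicate]
      simp [hSlen]
    have h3 := List.count_le_length (a := true)
      (l := ((pvSortEdges es).foldl pvStepA
        { L := PySem.List.pyRange 0 n 1, D := PySem.List.pyRepeat [1] n, total := 0,
          tree := (PySem.List.pyRange 0 n 1).map (fun _ => []),
          taken := PySem.List.pyRepeat [false] (PySem.List.len (pvSortEdges es)), idx := 0 }).taken)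
    rw [h1, h2] at h3
    omega
  · rw [if_pos ?_]
    have h1 := pv_usedle (pvSortEdges es)
      { comp := PySem.List.pyRange 0 n 1, total := 0,
        adj := (PySem.List.pyRange 0 n 1).map (fun _ => []), used := 0, extras := [] }
    simp only [hSlen] at h1
    omega

-- ===== VERDICT (by name: the statement is the Claim_ definition above) =====
theorem second_best_tree_spec : Claim_equal_second_best_tree := by
  intro n es _hdom hpre
  unfold Spec_second_best_tree
  rcases hpre with hpre | ⟨_, hfew⟩
  · apply pv_main
    intro e he
    have hperm : (pvSortEdges es).Perm es := by
      unfold pvSortEdges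
      exact PySem.List.sorted2_perm es _ _ false
    exact hpre e (hperm.mem_iff.mp he)
  · rw [(pv_trivial n es hfew).1, (pv_trivial n es hfew).2]
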